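-- pv_equiv track=rewrite | github.com/Adam-Jimenez/binarysearch-editorials | The Meeting Place Sequel.py | solve
-- ===== SOURCE A (Python) =====
-- def solve(matrix):
--     ppl={}
--     sets={}
--     for i,r in enumerate(matrix):
--         for j,v in enumerate(r):
--             if v==2:
--                 ppl[(i,j)] = [(i,j)]
--                 sets[(i,j)] = set()
--
--     if len(ppl)==0: return 0
--     cost={src_pos: 0 for src_pos in ppl.keys()}
--     done={src_pos: False for src_pos in ppl.keys()}
--     while not all(done.values()):
--         for src_pos,q in ppl.items():
--             if done[src_pos]: continue
--             seen=sets[src_pos]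
--             for i in range(len(q)):
--                 ci,cj = q.pop(0)
--                 if (ci,cj) in seen: continue
--                 seen.add((ci,cj))
--                 neighbors = get_neighbors(ci,cj,matrix)
--                 for ni,nj in neighbors:
--                     q.append((ni,nj))
--         for src_pos in ppl.keys():
--             if done[src_pos]: continue
--             seen=sets[src_pos]
--             if all(len(seen&x)>0 for x in sets.values()):
--                 done[src_pos]=True
--                 continue
--             cost[src_pos]+=1
--     return max(cost.values())
--
-- def get_neighbors(i,j,matrix):
--     directions=[(1,0),(-1,0),(0,1),(0,-1)]
--     n=[]
--     for di,dj in directions: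
--         ni,nj = i+di, j+dj
--         if ni>=0 and nj>=0 and ni<len(matrix) and nj<len(matrix[0]) and matrix[ni][nj] != 1:
--             n.append((ni,nj))
--     return n
-- ===== SOURCE B (Python) =====
-- def solve(matrix):
--     people = [(i, j) for i, row in enumerate(matrix) for j, v in enumerate(row) if v == 2]
--     if not people:
--         return 0
--     K = sum(len(row) for row in matrix)
--     C = len(matrix[0])
--
--     def bfs(p):
--         dist = {p: 0}
--         frontier = [p]
--         for d in range(1, K + 1):
--             nxt = []
--             for (ci, cj) in frontier:
--                 for (di, dj) in ((1, 0), (-1, 0), (0, 1), (0, -1)):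
--                     ni, nj = ci + di, cj + dj
--                     if ni >= 0 and nj >= 0 and ni < len(matrix) and nj < C \
--                             and matrix[ni][nj] != 1 and (ni, nj) not in dist:
--                         dist[(ni, nj)] = d
--                         nxt.append((ni, nj))
--             frontier = nxt
--         return dist
--
--     dists = [bfs(p) for p in people]
--     best = 0
--     for a in range(len(people)):
--         for b in range(a + 1, len(people)):
--             da, db = dists[a], dists[b]
--             m = None
--             for c, dc in da.items():
--                 if c in db:
--                     v = max(dc, db[c])
--                     if m is None or v < m:
--                         m = v
--             best = max(best, m)
--     return best
-- ===== Notes on version B (the rewrite author's own statement) =====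
-- stated objective: alternative
-- what changed: A runs one synchronized round-by-round multi-source expansion with per-person queues, frozen seen-sets and per-round all-pairs set-intersection tests until every ball meets every other; B instead computes an independent BFS distance map per person once and returns the max over pairs of the min over common cells of max(dist1,dist2).
-- outside the precondition, e.g. on solve([[2, 1], [0]]): A returns 0, B raises IndexError
import Mathlib
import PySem

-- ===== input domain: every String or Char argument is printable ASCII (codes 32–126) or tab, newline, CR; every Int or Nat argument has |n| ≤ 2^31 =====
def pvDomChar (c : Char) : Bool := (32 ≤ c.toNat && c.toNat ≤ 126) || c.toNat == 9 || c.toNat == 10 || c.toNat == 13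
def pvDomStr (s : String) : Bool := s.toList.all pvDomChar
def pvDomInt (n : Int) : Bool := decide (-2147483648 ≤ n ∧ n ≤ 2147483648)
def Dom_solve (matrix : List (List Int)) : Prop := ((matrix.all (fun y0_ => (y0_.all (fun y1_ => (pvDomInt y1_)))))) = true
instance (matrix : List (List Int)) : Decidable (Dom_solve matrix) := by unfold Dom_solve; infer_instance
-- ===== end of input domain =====

-- B replaces A's synchronized multi-source round-by-round expansion (queues + frozen seen-sets +
-- all-pairs set intersections each round) by one independent BFS distance map per person and
-- max over pairs of min over common cells of max(dist1, dist2); objective: alternative algorithm.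

-- ===== PORT A =====

def getNeighbors (i j : Int) (matrix : List (List Int)) : List (Int × Int) :=
  let directions : List (Int × Int) := [(1,0),(-1,0),(0,1),(0,-1)]
  directions.foldl (fun n d =>
    let ni := i + d.1
    let nj := j + d.2
    if ni ≥ 0 ∧ nj ≥ 0 ∧ ni < (matrix.length : Int) ∧ nj < ((matrix.headD []).length : Int) ∧
        PySem.List.pyGetD (PySem.List.pyGetD matrix ni []) nj 0 ≠ 1
    then n ++ [(ni, nj)] else n) []

structure AState where
  ppl  : PySem.Dict (Int × Int) (List (Int × Int))
  sets : PySem.Dict (Int × Int) (PySem.Set (Int × Int))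
  cost : PySem.Dict (Int × Int) Int
  done : PySem.Dict (Int × Int) Bool
  deriving Repr

-- the two initial dicts built by A's double enumerate loop
def initA (matrix : List (List Int)) :
    PySem.Dict (Int × Int) (List (Int × Int)) × PySem.Dict (Int × Int) (PySem.Set (Int × Int)) :=
  (PySem.List.enumerate matrix 0).foldl (fun st p =>
    (PySem.List.enumerate p.2 0).foldl (fun st2 q =>
      if q.2 = 2 then
        (st2.1.insert (p.1, q.1) [(p.1, q.1)], st2.2.insert (p.1, q.1) PySem.Set.empty)
      else st2) st) (PySem.Dict.empty, PySem.Dict.empty)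

-- 'for i in range(len(q)): ci,cj = q.pop(0); …' — n pops from the front, appends to the back
def innerA (matrix : List (List Int)) :
    Nat → List (Int × Int) → PySem.Set (Int × Int) → List (Int × Int) × PySem.Set (Int × Int)
  | 0, q, seen => (q, seen)
  | n+1, q, seen =>
    match q with
    | [] => ([], seen)   -- unreachable: Python pops at most len(q) times
    | c :: rest =>
      if PySem.Set.contains seen c then innerA matrix n rest seen
      else innerA matrix n (rest ++ getNeighbors c.1 c.2 matrix) (PySem.Set.add seen c)

-- first for-loop of A's while body
def phase1 (matrix : List (List Int)) (st : AState) : AState :=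
  st.ppl.keys.foldl (fun s src =>
    if s.done.getD src false then s
    else
      let q := s.ppl.getD src []
      let r := innerA matrix q.length q (s.sets.getD src PySem.Set.empty)
      { s with ppl := s.ppl.insert src r.1, sets := s.sets.insert src r.2 }) st

-- second for-loop of A's while body
def phase2 (st : AState) : AState :=
  st.ppl.keys.foldl (fun s src =>
    if s.done.getD src false then s
    else
      let seen := s.sets.getD src PySem.Set.empty
      if s.sets.values.all (fun x => PySem.Set.len (PySem.Set.inter seen x) > 0)
      then { s with done := s.done.insert src true }
      else { s with cost := s.cost.insert src (s.cost.getD src 0 + 1) }) st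

-- 'while not all(done.values()):' — fuel-bounded; under Pre_solve the fuel provably suffices
def loopA (matrix : List (List Int)) : Nat → AState → AState
  | 0, st => st
  | f+1, st =>
    if st.done.values.all (fun b => b) then st
    else loopA matrix f (phase2 (phase1 matrix st))

def solve (matrix : List (List Int)) : Int :=
  let pp := initA matrix
  if pp.1.size = 0 then 0
  else
    let cost0 := pp.1.keys.foldl (fun d k => d.insert k (0 : Int)) PySem.Dict.empty
    let done0 := pp.1.keys.foldl (fun d k => d.insert k false) PySem.Dict.empty
    let fuel := (matrix.foldl (fun a r => a + r.length) 0) + 2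
    let fin := loopA matrix fuel ⟨pp.1, pp.2, cost0, done0⟩
    (PySem.List.max? fin.cost.values (fun x => x)).getD 0

-- ===== PORT B =====

-- '[(i, j) for i, row in enumerate(matrix) for j, v in enumerate(row) if v == 2]'
def peopleL (matrix : List (List Int)) : List (Int × Int) :=
  (PySem.List.enumerate matrix 0).flatMap (fun p =>
    (PySem.List.enumerate p.2 0).filterMap (fun q => if q.2 = 2 then some (p.1, q.1) else none))

-- one BFS round of B: fold the frontier, trying the four directions on each cell
def bRound (matrix : List (List Int)) (C : Int) (d : Int)
    (st : PySem.Dict (Int × Int) Int × List (Int × Int)) :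
    PySem.Dict (Int × Int) Int × List (Int × Int) :=
  st.2.foldl (fun st2 c =>
    ([((1:Int),(0:Int)),(-1,0),(0,1),(0,-1)] : List (Int × Int)).foldl (fun st3 dd =>
      let ni := c.1 + dd.1
      let nj := c.2 + dd.2
      if ni ≥ 0 ∧ nj ≥ 0 ∧ ni < (matrix.length : Int) ∧ nj < C ∧
          PySem.List.pyGetD (PySem.List.pyGetD matrix ni []) nj 0 ≠ 1 ∧
          ¬ (st3.1.contains (ni, nj) = true)
      then (st3.1.insert (ni, nj) d, st3.2 ++ [(ni, nj)]) else st3) st2) (st.1, [])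

def bBFS (matrix : List (List Int)) (K : Nat) (C : Int) (p : Int × Int) :
    PySem.Dict (Int × Int) Int :=
  ((PySem.List.pyRange 1 ((K : Int) + 1) 1).foldl (fun st d => bRound matrix C d st)
    (PySem.Dict.empty.insert p 0, [p])).1

def solve_alt (matrix : List (List Int)) : Int :=
  let people := peopleL matrix
  if people.isEmpty then 0
  else
    let K := matrix.foldl (fun a r => a + r.length) 0
    let C := ((matrix.headD []).length : Int)
    let dists := people.map (bBFS matrix K C)
    (PySem.List.pyRange 0 (people.length : Int) 1).foldl (fun best a =>
      (PySem.List.pyRange (a + 1) (people.length : Int) 1).foldl (fun best b =>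
        let da := PySem.List.pyGetD dists a PySem.Dict.empty
        let db := PySem.List.pyGetD dists b PySem.Dict.empty
        let m := da.items.foldl (fun (m : Option Int) cv =>
          if db.contains cv.1 then
            let v := max cv.2 (db.getD cv.1 0)
            if m.isNone ∨ v < m.getD 0 then some v else m
          else m) none
        max best (m.getD 0)) best) 0

-- ===== PRECONDITION & SPEC =====

-- cumulative ball of radius r around s in the grid graph A and B both walk
def ballL (matrix : List (List Int)) (s : Int × Int) : Nat → PySem.Set (Int × Int)
  | 0 => PySem.Set.add PySem.Set.empty s
  | r+1 => PySem.Set.update (ballL matrix s r)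
      ((ballL matrix s r).flatMap (fun c => getNeighbors c.1 c.2 matrix))

def sumLen (matrix : List (List Int)) : Nat := matrix.foldl (fun a r => a + r.length) 0

-- Pre_solve excludes (a) matrices with people in which some row is shorter than row 0 — there A
-- raises IndexError, or returns only when its truncated search happens to avoid the missing cells
-- while B's exhaustive BFS raises — and (b) matrices with two people that are not connected
-- through non-wall cells, on which A's while-loop never terminates.
def Pre_solve (matrix : List (List Int)) : Prop :=
  (peopleL matrix = [] ∨ ∀ r ∈ matrix, (matrix.headD []).length ≤ r.length)
  ∧ ∀ s ∈ peopleL matrix, ∀ s' ∈ peopleL matrix,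
      ∃ c, c ∈ ballL matrix s (sumLen matrix) ∧ c ∈ ballL matrix s' (sumLen matrix)

instance (matrix : List (List Int)) : Decidable (Pre_solve matrix) := by
  unfold Pre_solve; infer_instance

def pvWitness_solve : List (List Int) := [[2, 0, 2], [0, 1, 0]]

def Spec_solve (matrix : List (List Int)) (out : Int) : Prop := out = solve_alt matrix
instance (matrix : List (List Int)) (out : Int) : Decidable (Spec_solve matrix out) := by
  unfold Spec_solve; infer_instance

-- ===== CLAIM (what is proved, stated in full; the proofs are below) =====
def Claim_equal_solve : Prop :=
  ∀ (matrix : List (List Int)), Dom_solve matrix → Pre_solve matrix → Spec_solve matrix (solve matrix)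

-- ===== LEMMAS AND PROOFS =====

-- ---------- generic list/fold helpers ----------

lemma foldl_max_le_int {α : Type} (l : List α) (g : α → Int) (a b : Int)
    (ha : a ≤ b) (h : ∀ x ∈ l, g x ≤ b) :
    l.foldl (fun acc x => max acc (g x)) a ≤ b := by
  induction l generalizing a with
  | nil => simpa using ha
  | cons y t ih =>
    simp only [List.foldl_cons]
    exact ih _ (max_le ha (h y (by simp))) (fun x hx => h x (by simp [hx]))

lemma foldl_max_le_nat {α : Type} (l : List α) (g : α → Nat) (a b : Nat)
    (ha : a ≤ b) (h : ∀ x ∈ l, g x ≤ b) :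
    l.foldl (fun acc x => max acc (g x)) a ≤ b := by
  induction l generalizing a with
  | nil => simpa using ha
  | cons y t ih =>
    simp only [List.foldl_cons]
    exact ih _ (max_le ha (h y (by simp))) (fun x hx => h x (by simp [hx]))

lemma foldl_le_of_step {α : Type} (F : Int → α → Int) (hF : ∀ acc x, acc ≤ F acc x) :
    ∀ (l : List α) (a : Int), a ≤ l.foldl F a := by
  intro l
  induction l with
  | nil => intro a; simp
  | cons y t ih => intro a; exact le_trans (hF a y) (by simpa using ih (F a y))

lemma foldl_attain {α : Type} (F : Int → α → Int) (hF : ∀ acc x, acc ≤ F acc x)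
    (v : Int) (x : α) (hg : ∀ acc, v ≤ F acc x) :
    ∀ (l : List α) (a : Int), x ∈ l → v ≤ l.foldl F a := by
  intro l
  induction l with
  | nil => intro a hx; simp at hx
  | cons y t ih =>
    intro a hx
    rcases List.mem_cons.mp hx with h | h
    · subst h
      exact le_trans (hg a) (by simpa using foldl_le_of_step F hF t (F a x))
    · simpa using ih (F a y) h

lemma foldl_add_nodup {α : Type} [BEq α] [LawfulBEq α] :
    ∀ (l acc : List α), (acc ++ l).Nodup → l.foldl PySem.Set.add acc = acc ++ l
  | [], acc, _ => by simp
  | y :: t, acc, h => by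
    have hy : y ∉ acc := by
      intro hmem
      have := List.Nodup.disjoint (l₁ := acc) (l₂ := y :: t) ?_
      · exact this hmem (by simp)
      · simpa using h
    have hadd : PySem.Set.add acc y = acc ++ [y] := by
      simp only [PySem.Set.add]
      rw [if_neg]
      simp only [PySem.Set.contains_eq_listContains]
      simpa using hy
    simp only [List.foldl_cons, hadd]
    rw [foldl_add_nodup t (acc ++ [y]) (by simpa using h)]
    simp

-- ---------- bounded least-witness search ----------

def lfind (f : Nat → Bool) : Nat → Nat → Nat
  | start, 0 => start
  | start, fuel+1 => if f start then start else lfind f (start+1) fuel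

lemma lfind_true (f : Nat → Bool) :
    ∀ (fuel start k : Nat), f (start + k) = true → k ≤ fuel →
      f (lfind f start fuel) = true ∧ lfind f start fuel ≤ start + k := by
  intro fuel
  induction fuel with
  | zero =>
    intro start k hf hk
    interval_cases k
    simpa [lfind] using hf
  | succ n ih =>
    intro start k hf hk
    simp only [lfind]
    split
    · rename_i h
      exact ⟨h, by omega⟩
    · rename_i h
      rcases k with _ | k
      · simp only [Nat.add_zero] at hf; simp [hf] at h
      · have harg : start + 1 + k = start + (k + 1) := by omega
        have := ih (start+1) k (by rw [harg]; exact hf) (by omega)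
        exact ⟨this.1, by omega⟩

lemma lfind_min (f : Nat → Bool) :
    ∀ (fuel start j : Nat), start ≤ j → j < lfind f start fuel → f j = false := by
  intro fuel
  induction fuel with
  | zero =>
    intro start j h1 h2
    simp [lfind] at h2; omega
  | succ n ih =>
    intro start j h1 h2
    simp only [lfind] at h2
    split at h2
    · omega
    · rename_i h
      rcases Nat.eq_or_lt_of_le h1 with rfl | hlt
      · simpa using h
      · exact ih (start+1) j (by omega) h2

-- ---------- balls ----------

lemma mem_ballL_zero (m : List (List Int)) (s c : Int × Int) :
    c ∈ ballL m s 0 ↔ c = s := by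
  simp [ballL, PySem.Set.empty]

lemma mem_ballL_succ (m : List (List Int)) (s c : Int × Int) (r : Nat) :
    c ∈ ballL m s (r+1) ↔
      c ∈ ballL m s r ∨ ∃ c' ∈ ballL m s r, c ∈ getNeighbors c'.1 c'.2 m := by
  simp only [ballL, PySem.Set.mem_update, List.mem_flatMap]

lemma self_mem_ballL (m : List (List Int)) (s : Int × Int) (r : Nat) :
    s ∈ ballL m s r := by
  induction r with
  | zero => simp [mem_ballL_zero]
  | succ n ih => exact (mem_ballL_succ m s s n).mpr (Or.inl ih)

lemma ballL_mono (m : List (List Int)) (s c : Int × Int) :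
    ∀ (r r' : Nat), r ≤ r' → c ∈ ballL m s r → c ∈ ballL m s r' := by
  intro r r' h hc
  induction h with
  | refl => exact hc
  | step _ ih => exact (mem_ballL_succ m s c _).mpr (Or.inl ih)

-- cells at level r+1 have a neighbor-parent at level exactly r (outermost shell)
lemma ballL_shell (m : List (List Int)) (s x : Int × Int) (r : Nat)
    (hx : x ∈ ballL m s (r+1)) (hx' : x ∉ ballL m s r) :
    ∃ c' ∈ ballL m s r, (r = 0 ∨ c' ∉ ballL m s (r-1)) ∧ x ∈ getNeighbors c'.1 c'.2 m := by
  rcases (mem_ballL_succ m s x r).mp hx with h | ⟨c', hc', hn⟩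
  · exact absurd h hx'
  · refine ⟨c', hc', ?_, hn⟩
    rcases Nat.eq_zero_or_pos r with rfl | hr
    · exact Or.inl rfl
    · refine Or.inr fun hmem => hx' ?_
      have : x ∈ ballL m s ((r-1)+1) := (mem_ballL_succ m s x (r-1)).mpr (Or.inr ⟨c', hmem, hn⟩)
      have hr1 : r - 1 + 1 = r := by omega
      rwa [hr1] at this

-- ---------- meeting radii ----------

def meetsB (m : List (List Int)) (s s' : Int × Int) (r : Nat) : Bool :=
  (ballL m s r).any (fun c => decide (c ∈ ballL m s' r))

def pMeet (m : List (List Int)) (s s' : Int × Int) : Nat :=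
  lfind (meetsB m s s') 0 (sumLen m + 1)

lemma meetsB_iff (m : List (List Int)) (s s' : Int × Int) (r : Nat) :
    meetsB m s s' r = true ↔ ∃ c, c ∈ ballL m s r ∧ c ∈ ballL m s' r := by
  simp [meetsB, List.any_eq_true]

lemma meetsB_symm (m : List (List Int)) (s s' : Int × Int) (r : Nat) :
    meetsB m s s' r = meetsB m s' s r := by
  by_cases h : meetsB m s s' r = true
  · rcases (meetsB_iff m s s' r).mp h with ⟨c, h1, h2⟩
    rw [h, Eq.comm]
    exact (meetsB_iff m s' s r).mpr ⟨c, h2, h1⟩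
  · have h' : meetsB m s' s r ≠ true := fun hc => by
      rcases (meetsB_iff m s' s r).mp hc with ⟨c, h1, h2⟩
      exact h ((meetsB_iff m s s' r).mpr ⟨c, h2, h1⟩)
    simp only [Bool.not_eq_true] at h h'
    rw [h, h']

lemma pMeet_symm (m : List (List Int)) (s s' : Int × Int) : pMeet m s s' = pMeet m s' s := by
  have : meetsB m s s' = meetsB m s' s := funext fun r => meetsB_symm m s s' r
  simp [pMeet, this]

lemma pMeet_self (m : List (List Int)) (s : Int × Int) : pMeet m s s = 0 := by
  have h0 : meetsB m s s 0 = true :=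
    (meetsB_iff m s s 0).mpr ⟨s, self_mem_ballL m s 0, self_mem_ballL m s 0⟩
  simp [pMeet, lfind, h0]

lemma pMeet_le (m : List (List Int)) (s s' : Int × Int)
    (hp : meetsB m s s' (sumLen m) = true) : pMeet m s s' ≤ sumLen m := by
  have := lfind_true (meetsB m s s') (sumLen m + 1) 0 (sumLen m) (by simpa using hp) (by omega)
  simpa [pMeet] using this.2

lemma meetsB_pMeet (m : List (List Int)) (s s' : Int × Int)
    (hp : meetsB m s s' (sumLen m) = true) : meetsB m s s' (pMeet m s s') = true := by
  have := lfind_true (meetsB m s s') (sumLen m + 1) 0 (sumLen m) (by simpa using hp) (by omega)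
  simpa [pMeet] using this.1

lemma pMeet_min (m : List (List Int)) (s s' : Int × Int) (r : Nat)
    (hr : r < pMeet m s s') : meetsB m s s' r = false := by
  exact lfind_min (meetsB m s s') (sumLen m + 1) 0 r (by omega) hr

-- ---------- people ----------

lemma nodup_peopleL (m : List (List Int)) : (peopleL m).Nodup := by
  have inner_mem : ∀ (i : Int) (r : List Int) (x : Int × Int),
      x ∈ (PySem.List.enumerate r 0).filterMap
        (fun q => if q.2 = 2 then some (i, q.1) else none) → x.1 = i := by
    intro i r x hx
    rcases List.mem_filterMap.mp hx with ⟨q, _, hq⟩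
    split at hq
    · cases hq; rfl
    · cases hq
  have inner_nodup : ∀ (i : Int) (r : List Int),
      ((PySem.List.enumerate r 0).filterMap
        (fun q => if q.2 = 2 then some (i, q.1) else none)).Nodup := by
    intro i r
    refine List.Nodup.filterMap ?_ ?_
    · intro a a' b hb hb'
      simp only [Option.mem_def] at hb hb'
      by_cases h2 : a.2 = 2
      · by_cases h2' : a'.2 = 2
        · rw [if_pos h2] at hb; rw [if_pos h2'] at hb'
          obtain ⟨a1, a2⟩ := a; obtain ⟨b1, b2⟩ := a'
          simp only at h2 h2'
          subst h2; subst h2'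
          rw [← hb] at hb'
          simp only [Option.some.injEq, Prod.mk.injEq] at hb'
          simp [hb'.2]
        · rw [if_neg h2'] at hb'; cases hb'
      · rw [if_neg h2] at hb; cases hb
    · exact ((PySem.List.pairwise_lt_enumerate r 0).imp
        (fun h heq => by subst heq; exact lt_irrefl _ h))
  suffices h : ∀ (l : List (List Int)) (a : Int),
      ((PySem.List.enumerate l a).flatMap (fun p =>
        (PySem.List.enumerate p.2 0).filterMap
          (fun q => if q.2 = 2 then some (p.1, q.1) else none))).Nodup by
    exact h m 0
  intro l
  induction l with
  | nil => intro a; simp [PySem.List.enumerate_nil]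
  | cons r t ih =>
    intro a
    rw [PySem.List.enumerate_cons]
    simp only [List.flatMap_cons]
    refine List.Nodup.append (inner_nodup a r) (ih (a+1)) ?_
    intro x hx hx'
    have h1 : x.1 = a := inner_mem a r x hx
    rcases List.mem_flatMap.mp hx' with ⟨p, hp, hxp⟩
    have h2 : x.1 = p.1 := inner_mem p.1 p.2 x hxp
    rcases (PySem.List.mem_enumerate_iff t (a+1) p).mp hp with ⟨k, hk, rfl⟩
    simp only at h2
    omega

def Mval (m : List (List Int)) (s : Int × Int) : Nat :=
  (peopleL m).foldl (fun a s' => max a (pMeet m s s')) 0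

lemma pMeet_le_Mval (m : List (List Int)) (s s' : Int × Int) (h : s' ∈ peopleL m) :
    pMeet m s s' ≤ Mval m s := by
  exact (PySem.List.le_foldl_max_nat (peopleL m) (fun s' => pMeet m s s') 0).2 s' h

lemma Mval_le (m : List (List Int)) (s : Int × Int) (b : Nat)
    (h : ∀ s' ∈ peopleL m, pMeet m s s' ≤ b) : Mval m s ≤ b := by
  exact foldl_max_le_nat (peopleL m) (fun s' => pMeet m s s') 0 b (by omega) h

lemma Mval_le_sumLen (m : List (List Int)) (s : Int × Int)
    (hp : ∀ s' ∈ peopleL m, meetsB m s s' (sumLen m) = true) :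
    Mval m s ≤ sumLen m := by
  exact Mval_le m s (sumLen m) fun s' hs' => pMeet_le m s s' (hp s' hs')

-- ---------- dictionaries built over a nodup key list ----------

lemma get?_foldl_insert {ν : Type} (f : Int × Int → ν) :
    ∀ (L : List (Int × Int)) (d : PySem.Dict (Int × Int) ν) (s : Int × Int), L.Nodup →
      (L.foldl (fun d k => d.insert k (f k)) d).get? s =
        if s ∈ L then some (f s) else d.get? s := by
  intro L
  induction L with
  | nil => intro d s _; simp
  | cons k t ih =>
    intro d s hnd
    have hk : k ∉ t := (List.nodup_cons.mp hnd).1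
    rw [List.foldl_cons, ih _ s (List.nodup_cons.mp hnd).2]
    by_cases hst : s ∈ t
    · simp [hst, List.mem_cons]
    · rw [PySem.Dict.get?_insert]
      by_cases hsk : s = k
      · subst hsk; simp [hst]
      · simp [hst, hsk]

lemma keys_foldl_insert_fresh {ν : Type} (f : Int × Int → ν) :
    ∀ (L : List (Int × Int)), L.Nodup →
      (L.foldl (fun d k => d.insert k (f k)) (PySem.Dict.empty (κ := Int × Int) (ν := ν))).keys = L := by
  intro L hnd
  rw [PySem.Dict.keys_foldl_insert (f := fun _ k => f k)]
  have h1 : (PySem.Dict.empty (κ := Int × Int) (ν := ν)).keys = [] := rfl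
  rw [h1]
  show L.foldl PySem.Set.add [] = L
  exact foldl_add_nodup L [] (by simpa using hnd)

lemma values_all_iff {ν : Type} (d : PySem.Dict (Int × Int) ν) (P : List (Int × Int))
    (hk : d.keys = P) (hnd : P.Nodup) (f : ν → Bool) (dflt : ν) :
    (d.values.all f = true) ↔ ∀ s ∈ P, f (d.getD s dflt) = true := by
  rw [PySem.Dict.values_eq_map_keys d (by rwa [hk]) dflt, hk]
  simp [List.all_eq_true]

-- ---------- A: initialisation ----------

lemma initA_eq (m : List (List Int)) :
    initA m = ((peopleL m).foldl (fun d k => d.insert k [k]) PySem.Dict.empty,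
               (peopleL m).foldl (fun d k => d.insert k PySem.Set.empty) PySem.Dict.empty) := by
  have inner_split : ∀ (e : List (Int × Int)) (i : Int)
      (d1 : PySem.Dict (Int × Int) (List (Int × Int)))
      (d2 : PySem.Dict (Int × Int) (PySem.Set (Int × Int))),
      e.foldl (fun st2 q =>
        if q.2 = 2 then
          (st2.1.insert (i, q.1) [(i, q.1)], st2.2.insert (i, q.1) PySem.Set.empty)
        else st2) (d1, d2) =
      ((e.filterMap (fun q => if q.2 = 2 then some (i, q.1) else none)).foldl
          (fun d k => d.insert k [k]) d1,
       (e.filterMap (fun q => if q.2 = 2 then some (i, q.1) else none)).foldl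
          (fun d k => d.insert k PySem.Set.empty) d2) := by
    intro e
    induction e with
    | nil => intro i d1 d2; simp
    | cons q t ih =>
      intro i d1 d2
      by_cases h2 : q.2 = 2
      · simp only [List.foldl_cons, List.filterMap_cons, h2, if_pos]
        rw [ih]
      · simp only [List.foldl_cons, List.filterMap_cons, h2, ite_false]
        rw [ih]
  have outer : ∀ (l : List (Int × List Int))
      (d1 : PySem.Dict (Int × Int) (List (Int × Int)))
      (d2 : PySem.Dict (Int × Int) (PySem.Set (Int × Int))),
      l.foldl (fun st p =>
        (PySem.List.enumerate p.2 0).foldl (fun st2 q =>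
          if q.2 = 2 then
            (st2.1.insert (p.1, q.1) [(p.1, q.1)], st2.2.insert (p.1, q.1) PySem.Set.empty)
          else st2) st) (d1, d2) =
      ((l.flatMap (fun p => (PySem.List.enumerate p.2 0).filterMap
          (fun q => if q.2 = 2 then some (p.1, q.1) else none))).foldl
          (fun d k => d.insert k [k]) d1,
       (l.flatMap (fun p => (PySem.List.enumerate p.2 0).filterMap
          (fun q => if q.2 = 2 then some (p.1, q.1) else none))).foldl
          (fun d k => d.insert k PySem.Set.empty) d2) := by
    intro l
    induction l with
    | nil => intro d1 d2; simp
    | cons p t ih =>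
      intro d1 d2
      simp only [List.foldl_cons, List.flatMap_cons, List.foldl_append]
      rw [inner_split, ih]
  exact outer (PySem.List.enumerate m 0) PySem.Dict.empty PySem.Dict.empty

-- ---------- A: the inner queue loop ----------

lemma innerA_spec (m : List (List Int)) :
    ∀ (n : Nat) (q : List (Int × Int)) (seen : PySem.Set (Int × Int)), n ≤ q.length →
      (∀ x, x ∈ (innerA m n q seen).2 ↔ x ∈ seen ∨ x ∈ q.take n) ∧
      (∀ x, x ∈ (innerA m n q seen).1 ↔
        x ∈ q.drop n ∨ ∃ c ∈ q.take n, c ∉ seen ∧ x ∈ getNeighbors c.1 c.2 m) := by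
  intro n
  induction n with
  | zero => intro q seen _; simp [innerA]
  | succ n ih =>
    intro q seen hn
    match q with
    | [] => simp at hn
    | c :: rest =>
      have hn' : n ≤ rest.length := by simpa using hn
      by_cases hc : PySem.Set.contains seen c = true
      · have hcs : c ∈ seen := (PySem.Set.contains_iff seen c).mp hc
        have hstep : innerA m (n+1) (c :: rest) seen = innerA m n rest seen := by
          simp only [innerA]
          rw [if_pos hc]
        rw [hstep]
        obtain ⟨ih2, ih1⟩ := ih rest seen hn'
        constructor
        · intro x
          rw [ih2 x]
          simp only [List.take_succ_cons, List.mem_cons]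
          constructor
          · rintro (h | h)
            · exact Or.inl h
            · exact Or.inr (Or.inr h)
          · rintro (h | h | h)
            · exact Or.inl h
            · exact Or.inl (h ▸ hcs)
            · exact Or.inr h
        · intro x
          rw [ih1 x]
          simp only [List.drop_succ_cons, List.take_succ_cons, List.mem_cons]
          constructor
          · rintro (h | ⟨c', hc', hns, hx⟩)
            · exact Or.inl h
            · exact Or.inr ⟨c', Or.inr hc', hns, hx⟩
          · rintro (h | ⟨c', hc' | hc', hns, hx⟩)
            · exact Or.inl h
            · exact absurd (hc' ▸ hcs) hns
            · exact Or.inr ⟨c', hc', hns, hx⟩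
      · have hcs : c ∉ seen := fun h => hc ((PySem.Set.contains_iff seen c).mpr h)
        have hstep : innerA m (n+1) (c :: rest) seen =
            innerA m n (rest ++ getNeighbors c.1 c.2 m) (PySem.Set.add seen c) := by
          simp only [innerA]
          rw [if_neg hc]
        rw [hstep]
        have hlen : n ≤ (rest ++ getNeighbors c.1 c.2 m).length := by
          simp; omega
        obtain ⟨ih2, ih1⟩ := ih (rest ++ getNeighbors c.1 c.2 m) (PySem.Set.add seen c) hlen
        have htake : (rest ++ getNeighbors c.1 c.2 m).take n = rest.take n :=
          List.take_append_of_le_length hn'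
        have hdrop : (rest ++ getNeighbors c.1 c.2 m).drop n =
            rest.drop n ++ getNeighbors c.1 c.2 m :=
          List.drop_append_of_le_length hn'
        constructor
        · intro x
          rw [ih2 x, htake, PySem.Set.mem_add]
          simp only [List.take_succ_cons, List.mem_cons]
          tauto
        · intro x
          rw [ih1 x, htake, hdrop]
          simp only [List.drop_succ_cons, List.take_succ_cons, List.mem_cons, List.mem_append]
          constructor
          · rintro ((h | h) | ⟨c', hc', hns, hx⟩)
            · exact Or.inl h
            · exact Or.inr ⟨c, Or.inl rfl, hcs, h⟩
            · rw [PySem.Set.mem_add] at hns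
              exact Or.inr ⟨c', Or.inr hc', fun hmem => hns (Or.inl hmem), hx⟩
          · rintro (h | ⟨c', hc' | hc', hns, hx⟩)
            · exact Or.inl (Or.inl h)
            · exact Or.inl (Or.inr (hc' ▸ hx))
            · by_cases hceq : c' = c
              · exact Or.inl (Or.inr (hceq ▸ hx))
              · refine Or.inr ⟨c', hc', ?_, hx⟩
                rw [PySem.Set.mem_add]
                rintro (h | h)
                · exact hns h
                · exact hceq h

-- ---------- A: phase folds ----------

def p1f (m : List (List Int)) : AState → (Int × Int) → AState := fun s src =>
  if s.done.getD src false then s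
  else
    let q := s.ppl.getD src []
    let r := innerA m q.length q (s.sets.getD src PySem.Set.empty)
    { s with ppl := s.ppl.insert src r.1, sets := s.sets.insert src r.2 }

def p2f : AState → (Int × Int) → AState := fun s src =>
  if s.done.getD src false then s
  else
    let seen := s.sets.getD src PySem.Set.empty
    if s.sets.values.all (fun x => PySem.Set.len (PySem.Set.inter seen x) > 0)
    then { s with done := s.done.insert src true }
    else { s with cost := s.cost.insert src (s.cost.getD src 0 + 1) }

lemma phase1_eq (m : List (List Int)) (st : AState) :
    phase1 m st = st.ppl.keys.foldl (p1f m) st := by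
  rfl

lemma phase2_eq (st : AState) :
    phase2 st = st.ppl.keys.foldl p2f st := by
  rfl

lemma p1go_done_cost (m : List (List Int)) :
    ∀ (L : List (Int × Int)) (st : AState),
      (L.foldl (p1f m) st).done = st.done ∧ (L.foldl (p1f m) st).cost = st.cost := by
  intro L
  induction L with
  | nil => intro st; exact ⟨rfl, rfl⟩
  | cons k t ih =>
    intro st
    have hstep : (p1f m st k).done = st.done ∧ (p1f m st k).cost = st.cost := by
      simp only [p1f]; split
      · exact ⟨rfl, rfl⟩
      · exact ⟨rfl, rfl⟩
    rw [List.foldl_cons]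
    exact ⟨(ih (p1f m st k)).1.trans hstep.1, (ih (p1f m st k)).2.trans hstep.2⟩

lemma p1go_get_notmem (m : List (List Int)) :
    ∀ (L : List (Int × Int)) (st : AState) (s : Int × Int), s ∉ L →
      (L.foldl (p1f m) st).ppl.get? s = st.ppl.get? s ∧
      (L.foldl (p1f m) st).sets.get? s = st.sets.get? s := by
  intro L
  induction L with
  | nil => intro st s _; exact ⟨rfl, rfl⟩
  | cons k t ih =>
    intro st s hs
    have hsk : s ≠ k := fun h => hs (by simp [h])
    have hst : s ∉ t := fun h => hs (by simp [h])
    have hstep : (p1f m st k).ppl.get? s = st.ppl.get? s ∧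
        (p1f m st k).sets.get? s = st.sets.get? s := by
      simp only [p1f]; split
      · exact ⟨rfl, rfl⟩
      · exact ⟨PySem.Dict.get?_insert_of_ne _ _ hsk, PySem.Dict.get?_insert_of_ne _ _ hsk⟩
    rw [List.foldl_cons]
    exact ⟨(ih (p1f m st k) s hst).1.trans hstep.1, (ih (p1f m st k) s hst).2.trans hstep.2⟩

lemma p1go_get_mem (m : List (List Int)) :
    ∀ (L : List (Int × Int)) (st : AState) (s : Int × Int), L.Nodup → s ∈ L →
      ((L.foldl (p1f m) st).ppl.get? s, (L.foldl (p1f m) st).sets.get? s) =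
        (if st.done.getD s false then (st.ppl.get? s, st.sets.get? s)
         else
          (some (innerA m (st.ppl.getD s []).length (st.ppl.getD s [])
                  (st.sets.getD s PySem.Set.empty)).1,
           some (innerA m (st.ppl.getD s []).length (st.ppl.getD s [])
                  (st.sets.getD s PySem.Set.empty)).2)) := by
  intro L
  induction L with
  | nil => intro st s _ hs; simp at hs
  | cons k t ih =>
    intro st s hnd hs
    have hndt : t.Nodup := (List.nodup_cons.mp hnd).2
    have hkt : k ∉ t := (List.nodup_cons.mp hnd).1
    rw [List.foldl_cons]
    rcases List.mem_cons.mp hs with rfl | hst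
    · -- s = k : processed first, untouched afterwards
      have hrest := p1go_get_notmem m t (p1f m st s) s hkt
      rw [hrest.1, hrest.2]
      simp only [p1f]
      split
      · simp
      · exact Prod.ext (PySem.Dict.get?_insert_self _ _ _) (PySem.Dict.get?_insert_self _ _ _)
    · -- s ∈ t : the step at k does not touch s's entries
      have hsk : s ≠ k := fun h => hkt (h ▸ hst)
      have hstep_ppl : (p1f m st k).ppl.get? s = st.ppl.get? s := by
        simp only [p1f]; split
        · rfl
        · exact PySem.Dict.get?_insert_of_ne _ _ hsk
      have hstep_sets : (p1f m st k).sets.get? s = st.sets.get? s := by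
        simp only [p1f]; split
        · rfl
        · exact PySem.Dict.get?_insert_of_ne _ _ hsk
      have hstep_done : (p1f m st k).done = st.done := by
        simp only [p1f]; split
        · rfl
        · rfl
      have hgetD_ppl : (p1f m st k).ppl.getD s [] = st.ppl.getD s [] := by
        rw [PySem.Dict.getD_eq_get?_getD, hstep_ppl, ← PySem.Dict.getD_eq_get?_getD]
      have hgetD_sets : (p1f m st k).sets.getD s PySem.Set.empty =
          st.sets.getD s PySem.Set.empty := by
        rw [PySem.Dict.getD_eq_get?_getD, hstep_sets, ← PySem.Dict.getD_eq_get?_getD]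
      rw [ih (p1f m st k) s hndt hst, hstep_done, hgetD_ppl, hgetD_sets,
          hstep_ppl, hstep_sets]

lemma p1go_keys (m : List (List Int)) :
    ∀ (L : List (Int × Int)) (st : AState),
      (∀ k ∈ L, st.ppl.contains k = true ∧ st.sets.contains k = true) →
      (L.foldl (p1f m) st).ppl.keys = st.ppl.keys ∧
      (L.foldl (p1f m) st).sets.keys = st.sets.keys := by
  intro L
  induction L with
  | nil => intro st _; exact ⟨rfl, rfl⟩
  | cons k t ih =>
    intro st hmem
    have hk := hmem k (by simp)
    have hstep : (p1f m st k).ppl.keys = st.ppl.keys ∧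
        (p1f m st k).sets.keys = st.sets.keys := by
      simp only [p1f]; split
      · exact ⟨rfl, rfl⟩
      · exact ⟨PySem.Dict.keys_insert_of_contains _ _ hk.1,
               PySem.Dict.keys_insert_of_contains _ _ hk.2⟩
    have hcont : ∀ k' ∈ t, (p1f m st k).ppl.contains k' = true ∧
        (p1f m st k).sets.contains k' = true := by
      intro k' hk'
      have h := hmem k' (by simp [hk'])
      constructor
      · rw [PySem.Dict.contains_iff_mem_keys, hstep.1, ← PySem.Dict.contains_iff_mem_keys]
        exact h.1
      · rw [PySem.Dict.contains_iff_mem_keys, hstep.2, ← PySem.Dict.contains_iff_mem_keys]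
        exact h.2
    rw [List.foldl_cons]
    exact ⟨(ih (p1f m st k) hcont).1.trans hstep.1, (ih (p1f m st k) hcont).2.trans hstep.2⟩

lemma p2go_keys :
    ∀ (L : List (Int × Int)) (st : AState),
      (∀ k ∈ L, st.done.contains k = true ∧ st.cost.contains k = true) →
      (L.foldl p2f st).done.keys = st.done.keys ∧
      (L.foldl p2f st).cost.keys = st.cost.keys := by
  intro L
  induction L with
  | nil => intro st _; exact ⟨rfl, rfl⟩
  | cons k t ih =>
    intro st hmem
    have hk := hmem k (by simp)
    have hstep : (p2f st k).done.keys = st.done.keys ∧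
        (p2f st k).cost.keys = st.cost.keys := by
      simp only [p2f]; split
      · exact ⟨rfl, rfl⟩
      · split
        · exact ⟨PySem.Dict.keys_insert_of_contains _ _ hk.1, rfl⟩
        · exact ⟨rfl, PySem.Dict.keys_insert_of_contains _ _ hk.2⟩
    have hcont : ∀ k' ∈ t, (p2f st k).done.contains k' = true ∧
        (p2f st k).cost.contains k' = true := by
      intro k' hk'
      have h := hmem k' (by simp [hk'])
      constructor
      · rw [PySem.Dict.contains_iff_mem_keys, hstep.1, ← PySem.Dict.contains_iff_mem_keys]
        exact h.1
      · rw [PySem.Dict.contains_iff_mem_keys, hstep.2, ← PySem.Dict.contains_iff_mem_keys]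
        exact h.2
    rw [List.foldl_cons]
    exact ⟨(ih (p2f st k) hcont).1.trans hstep.1, (ih (p2f st k) hcont).2.trans hstep.2⟩

lemma p2go_ppl_sets :
    ∀ (L : List (Int × Int)) (st : AState),
      (L.foldl p2f st).ppl = st.ppl ∧ (L.foldl p2f st).sets = st.sets := by
  intro L
  induction L with
  | nil => intro st; exact ⟨rfl, rfl⟩
  | cons k t ih =>
    intro st
    have hstep : (p2f st k).ppl = st.ppl ∧ (p2f st k).sets = st.sets := by
      simp only [p2f]; split
      · exact ⟨rfl, rfl⟩
      · split
        · exact ⟨rfl, rfl⟩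
        · exact ⟨rfl, rfl⟩
    rw [List.foldl_cons]
    exact ⟨(ih (p2f st k)).1.trans hstep.1, (ih (p2f st k)).2.trans hstep.2⟩

lemma p2go_get_notmem :
    ∀ (L : List (Int × Int)) (st : AState) (s : Int × Int), s ∉ L →
      (L.foldl p2f st).done.get? s = st.done.get? s ∧
      (L.foldl p2f st).cost.get? s = st.cost.get? s := by
  intro L
  induction L with
  | nil => intro st s _; exact ⟨rfl, rfl⟩
  | cons k t ih =>
    intro st s hs
    have hsk : s ≠ k := fun h => hs (by simp [h])
    have hst : s ∉ t := fun h => hs (by simp [h])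
    have hstep : (p2f st k).done.get? s = st.done.get? s ∧
        (p2f st k).cost.get? s = st.cost.get? s := by
      simp only [p2f]; split
      · exact ⟨rfl, rfl⟩
      · split
        · exact ⟨PySem.Dict.get?_insert_of_ne _ _ hsk, rfl⟩
        · exact ⟨rfl, PySem.Dict.get?_insert_of_ne _ _ hsk⟩
    rw [List.foldl_cons]
    exact ⟨(ih (p2f st k) s hst).1.trans hstep.1, (ih (p2f st k) s hst).2.trans hstep.2⟩

lemma p2go_get_mem :
    ∀ (L : List (Int × Int)) (st : AState) (s : Int × Int), L.Nodup → s ∈ L →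
      ((L.foldl p2f st).done.get? s, (L.foldl p2f st).cost.get? s) =
        (if st.done.getD s false then (st.done.get? s, st.cost.get? s)
         else if st.sets.values.all (fun x =>
                PySem.Set.len (PySem.Set.inter (st.sets.getD s PySem.Set.empty) x) > 0)
         then (some true, st.cost.get? s)
         else (st.done.get? s, some (st.cost.getD s 0 + 1))) := by
  intro L
  induction L with
  | nil => intro st s _ hs; simp at hs
  | cons k t ih =>
    intro st s hnd hs
    have hndt : t.Nodup := (List.nodup_cons.mp hnd).2
    have hkt : k ∉ t := (List.nodup_cons.mp hnd).1
    rw [List.foldl_cons]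
    rcases List.mem_cons.mp hs with rfl | hst
    · have hrest := p2go_get_notmem t (p2f st s) s hkt
      rw [hrest.1, hrest.2]
      simp only [p2f]
      split
      · simp
      · split
        · exact Prod.ext (PySem.Dict.get?_insert_self _ _ _) rfl
        · exact Prod.ext rfl (PySem.Dict.get?_insert_self _ _ _)
    · have hsk : s ≠ k := fun h => hkt (h ▸ hst)
      have hstep_done : (p2f st k).done.get? s = st.done.get? s := by
        simp only [p2f]; split
        · rfl
        · split
          · exact PySem.Dict.get?_insert_of_ne _ _ hsk
          · rfl
      have hstep_cost : (p2f st k).cost.get? s = st.cost.get? s := by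
        simp only [p2f]; split
        · rfl
        · split
          · rfl
          · exact PySem.Dict.get?_insert_of_ne _ _ hsk
      have hstep_sets : (p2f st k).sets = st.sets := by
        simp only [p2f]; split
        · rfl
        · split
          · rfl
          · rfl
      have hgetD_done : (p2f st k).done.getD s false = st.done.getD s false := by
        rw [PySem.Dict.getD_eq_get?_getD, hstep_done, ← PySem.Dict.getD_eq_get?_getD]
      have hgetD_cost : (p2f st k).cost.getD s 0 = st.cost.getD s 0 := by
        rw [PySem.Dict.getD_eq_get?_getD, hstep_cost, ← PySem.Dict.getD_eq_get?_getD]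
      rw [ih (p2f st k) s hndt hst, hgetD_done, hstep_sets, hgetD_cost,
          hstep_done, hstep_cost]

-- ---------- A: the invariant ----------

def InvA (m : List (List Int)) (t : Nat) (st : AState) : Prop :=
  st.ppl.keys = peopleL m ∧ st.sets.keys = peopleL m ∧
  st.cost.keys = peopleL m ∧ st.done.keys = peopleL m ∧
  ∀ s ∈ peopleL m,
    st.done.get? s = some (decide (Mval m s + 1 ≤ t)) ∧
    st.cost.get? s = some ((min t (Mval m s) : Nat) : Int) ∧
    (∃ S, st.sets.get? s = some S ∧
      ∀ c, c ∈ S ↔ (1 ≤ t ∧ c ∈ ballL m s (min (t-1) (Mval m s)))) ∧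
    (∃ q, st.ppl.get? s = some q ∧ (t ≤ Mval m s →
        (∀ c ∈ q, c ∈ ballL m s t) ∧
        ∀ c, c ∈ ballL m s t → c ∈ q ∨ (1 ≤ t ∧ c ∈ ballL m s (t-1))))

lemma invA_init (m : List (List Int)) :
    InvA m 0 ⟨(initA m).1, (initA m).2,
      (initA m).1.keys.foldl (fun d k => d.insert k (0 : Int)) PySem.Dict.empty,
      (initA m).1.keys.foldl (fun d k => d.insert k false) PySem.Dict.empty⟩ := by
  have hnd := nodup_peopleL m
  have hppl1 : (initA m).1 = (peopleL m).foldl (fun d k => d.insert k [k]) PySem.Dict.empty := by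
    rw [initA_eq]
  have hsets1 : (initA m).2 =
      (peopleL m).foldl (fun d k => d.insert k PySem.Set.empty) PySem.Dict.empty := by
    rw [initA_eq]
  have hkeys : (initA m).1.keys = peopleL m := by
    rw [hppl1]; exact keys_foldl_insert_fresh _ _ hnd
  have hkeys2 : (initA m).2.keys = peopleL m := by
    rw [hsets1]; exact keys_foldl_insert_fresh _ _ hnd
  refine ⟨hkeys, hkeys2, ?_, ?_, ?_⟩
  · show ((initA m).1.keys.foldl (fun d k => d.insert k (0 : Int)) PySem.Dict.empty).keys
      = peopleL m
    rw [hkeys]; exact keys_foldl_insert_fresh _ _ hnd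
  · show ((initA m).1.keys.foldl (fun d k => d.insert k false) PySem.Dict.empty).keys
      = peopleL m
    rw [hkeys]; exact keys_foldl_insert_fresh _ _ hnd
  · intro s hs
    refine ⟨?_, ?_, ?_, ?_⟩
    · show ((initA m).1.keys.foldl (fun d k => d.insert k false) PySem.Dict.empty).get? s = _
      rw [hkeys, get?_foldl_insert (fun _ => false) _ _ _ hnd, if_pos hs]
      simp
    · show ((initA m).1.keys.foldl (fun d k => d.insert k (0 : Int)) PySem.Dict.empty).get? s = _
      rw [hkeys, get?_foldl_insert (fun _ => (0 : Int)) _ _ _ hnd, if_pos hs]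
      simp
    · refine ⟨PySem.Set.empty, ?_, ?_⟩
      · show (initA m).2.get? s = some PySem.Set.empty
        rw [hsets1, get?_foldl_insert (fun _ => PySem.Set.empty) _ _ _ hnd, if_pos hs]
      · intro c; simp [PySem.Set.empty]
    · refine ⟨[s], ?_, ?_⟩
      · show (initA m).1.get? s = some [s]
        rw [hppl1, get?_foldl_insert (fun k => [k]) _ _ _ hnd, if_pos hs]
      · intro _
        constructor
        · intro c hc
          rcases List.mem_singleton.mp hc with rfl
          exact self_mem_ballL m c 0
        · intro c hc
          exact Or.inl (by simpa using (mem_ballL_zero m s c).mp hc)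

lemma invA_step (m : List (List Int))
    (hp : ∀ s ∈ peopleL m, ∀ s' ∈ peopleL m, meetsB m s s' (sumLen m) = true)
    (t : Nat) (st : AState) (h : InvA m t st) :
    InvA m (t+1) (phase2 (phase1 m st)) := by
  obtain ⟨hk1, hk2, hk3, hk4, hS⟩ := h
  have hnd := nodup_peopleL m
  have hcont1 : ∀ k ∈ peopleL m, st.ppl.contains k = true ∧ st.sets.contains k = true := by
    intro k hk
    constructor
    · rw [PySem.Dict.contains_iff_mem_keys, hk1]; exact hk
    · rw [PySem.Dict.contains_iff_mem_keys, hk2]; exact hk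
  have h1eq : phase1 m st = (peopleL m).foldl (p1f m) st := by rw [phase1_eq, hk1]
  have h1done : (phase1 m st).done = st.done := by rw [h1eq]; exact (p1go_done_cost m _ st).1
  have h1cost : (phase1 m st).cost = st.cost := by rw [h1eq]; exact (p1go_done_cost m _ st).2
  have h1kp : (phase1 m st).ppl.keys = peopleL m := by
    rw [h1eq, (p1go_keys m _ st hcont1).1, hk1]
  have h1ks : (phase1 m st).sets.keys = peopleL m := by
    rw [h1eq, (p1go_keys m _ st hcont1).2, hk2]
  -- per-person state after phase 1
  have key1 : ∀ s ∈ peopleL m,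
      (∃ S, (phase1 m st).sets.get? s = some S ∧
        ∀ c, c ∈ S ↔ c ∈ ballL m s (min t (Mval m s))) ∧
      (∃ q, (phase1 m st).ppl.get? s = some q ∧ (t + 1 ≤ Mval m s →
        (∀ c ∈ q, c ∈ ballL m s (t+1)) ∧
        ∀ c, c ∈ ballL m s (t+1) → c ∈ q ∨ c ∈ ballL m s t)) := by
    intro s hs
    obtain ⟨hdone, hcost, ⟨S, hSget, hSmem⟩, ⟨q, hqget, hqinv⟩⟩ := hS s hs
    have hgetD_done : st.done.getD s false = decide (Mval m s + 1 ≤ t) := by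
      rw [PySem.Dict.getD_eq_get?_getD, hdone]; rfl
    have hpair : ((phase1 m st).ppl.get? s, (phase1 m st).sets.get? s) =
        (if st.done.getD s false then (st.ppl.get? s, st.sets.get? s)
         else
          (some (innerA m (st.ppl.getD s []).length (st.ppl.getD s [])
                  (st.sets.getD s PySem.Set.empty)).1,
           some (innerA m (st.ppl.getD s []).length (st.ppl.getD s [])
                  (st.sets.getD s PySem.Set.empty)).2)) := by
      rw [h1eq]; exact p1go_get_mem m (peopleL m) st s hnd hs
    by_cases hfr : Mval m s + 1 ≤ t
    · -- frozen: entries unchanged, the ball is stuck at radius Mval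
      rw [if_pos (by rw [hgetD_done]; simpa using hfr)] at hpair
      have hp1 : (phase1 m st).ppl.get? s = st.ppl.get? s := congrArg Prod.fst hpair
      have hp2 : (phase1 m st).sets.get? s = st.sets.get? s := congrArg Prod.snd hpair
      constructor
      · refine ⟨S, by rw [hp2, hSget], ?_⟩
        intro c
        rw [hSmem c]
        have e1 : min (t-1) (Mval m s) = Mval m s := by omega
        have e2 : min t (Mval m s) = Mval m s := by omega
        rw [e1, e2]
        constructor
        · rintro ⟨_, hc⟩; exact hc
        · intro hc; exact ⟨by omega, hc⟩
      · exact ⟨q, by rw [hp1, hqget], fun hguard => absurd hguard (by omega)⟩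
    · -- active: the queue is emptied into seen, neighbours are enqueued
      have hle : t ≤ Mval m s := by omega
      rw [if_neg (by rw [hgetD_done]; simpa using hfr)] at hpair
      have hq0 : st.ppl.getD s [] = q := by
        rw [PySem.Dict.getD_eq_get?_getD, hqget]; rfl
      have hs0 : st.sets.getD s PySem.Set.empty = S := by
        rw [PySem.Dict.getD_eq_get?_getD, hSget]; rfl
      rw [hq0, hs0] at hpair
      have hp1 : (phase1 m st).ppl.get? s = some (innerA m q.length q S).1 :=
        congrArg Prod.fst hpair
      have hp2 : (phase1 m st).sets.get? s = some (innerA m q.length q S).2 :=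
        congrArg Prod.snd hpair
      obtain ⟨hqball, hqcover⟩ := hqinv hle
      obtain ⟨hseen', hq'⟩ := innerA_spec m q.length q S (le_refl _)
      have hSmem' : ∀ c, c ∈ S ↔ (1 ≤ t ∧ c ∈ ballL m s (t-1)) := by
        intro c
        rw [hSmem c]
        have e : min (t-1) (Mval m s) = t - 1 := by omega
        rw [e]
      constructor
      · refine ⟨(innerA m q.length q S).2, hp2, ?_⟩
        intro c
        have e : min t (Mval m s) = t := by omega
        rw [e, hseen' c, List.take_length]
        constructor
        · rintro (hc | hc)
          · rcases (hSmem' c).mp hc with ⟨ht1, hc⟩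
            exact ballL_mono m s c (t-1) t (by omega) hc
          · exact hqball c hc
        · intro hc
          rcases hqcover c hc with hcq | ⟨ht1, hc'⟩
          · exact Or.inr hcq
          · exact Or.inl ((hSmem' c).mpr ⟨ht1, hc'⟩)
      · refine ⟨(innerA m q.length q S).1, hp1, ?_⟩
        intro hguard
        have hqmem : ∀ x, x ∈ (innerA m q.length q S).1 ↔
            ∃ c ∈ q, c ∉ S ∧ x ∈ getNeighbors c.1 c.2 m := by
          intro x
          rw [hq' x, List.take_length, List.drop_length]
          simp
        constructor
        · intro x hx
          rcases (hqmem x).mp hx with ⟨c, hcq, _, hnbr⟩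
          exact (mem_ballL_succ m s x t).mpr (Or.inr ⟨c, hqball c hcq, hnbr⟩)
        · intro x hx
          by_cases hxt : x ∈ ballL m s t
          · exact Or.inr hxt
          · left
            obtain ⟨c', hc't, hcond, hnbr⟩ := ballL_shell m s x t hx hxt
            have hc'q : c' ∈ q := by
              rcases hqcover c' hc't with hcq | ⟨ht1, hc''⟩
              · exact hcq
              · rcases hcond with h0 | hnm
                · omega
                · exact absurd hc'' hnm
            have hc'S : c' ∉ S := by
              intro hmem
              rcases (hSmem' c').mp hmem with ⟨ht1, hc''⟩
              rcases hcond with h0 | hnm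
              · omega
              · exact hnm hc''
            exact (hqmem x).mpr ⟨c', hc'q, hc'S, hnbr⟩
  -- phase 2
  have h2eq : phase2 (phase1 m st) = (peopleL m).foldl p2f (phase1 m st) := by
    rw [phase2_eq, h1kp]
  have h2ppl : (phase2 (phase1 m st)).ppl = (phase1 m st).ppl := by
    rw [h2eq]; exact (p2go_ppl_sets _ _).1
  have h2sets : (phase2 (phase1 m st)).sets = (phase1 m st).sets := by
    rw [h2eq]; exact (p2go_ppl_sets _ _).2
  have hcont2 : ∀ k ∈ peopleL m, (phase1 m st).done.contains k = true ∧
      (phase1 m st).cost.contains k = true := by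
    intro k hk
    rw [h1done, h1cost]
    constructor
    · rw [PySem.Dict.contains_iff_mem_keys, hk4]; exact hk
    · rw [PySem.Dict.contains_iff_mem_keys, hk3]; exact hk
  have h2kd : (phase2 (phase1 m st)).done.keys = peopleL m := by
    rw [h2eq, (p2go_keys _ _ hcont2).1, h1done, hk4]
  have h2kc : (phase2 (phase1 m st)).cost.keys = peopleL m := by
    rw [h2eq, (p2go_keys _ _ hcont2).2, h1cost, hk3]
  refine ⟨by rw [h2ppl, h1kp], by rw [h2sets, h1ks], h2kc, h2kd, ?_⟩
  intro s hs
  obtain ⟨⟨S1, hS1get, hS1mem⟩, ⟨q1, hq1get, hq1inv⟩⟩ := key1 s hs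
  obtain ⟨hdone0, hcost0, _, _⟩ := hS s hs
  have hgetD1done : (phase1 m st).done.getD s false = decide (Mval m s + 1 ≤ t) := by
    rw [h1done, PySem.Dict.getD_eq_get?_getD, hdone0]; rfl
  have hpair2 : ((phase2 (phase1 m st)).done.get? s, (phase2 (phase1 m st)).cost.get? s) =
      (if (phase1 m st).done.getD s false then
        ((phase1 m st).done.get? s, (phase1 m st).cost.get? s)
       else if (phase1 m st).sets.values.all (fun x =>
              PySem.Set.len (PySem.Set.inter ((phase1 m st).sets.getD s PySem.Set.empty) x) > 0)
       then (some true, (phase1 m st).cost.get? s)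
       else ((phase1 m st).done.get? s, some ((phase1 m st).cost.getD s 0 + 1))) := by
    rw [h2eq]; exact p2go_get_mem (peopleL m) (phase1 m st) s hnd hs
  have hdone1get : (phase1 m st).done.get? s = some (decide (Mval m s + 1 ≤ t)) := by
    rw [h1done, hdone0]
  have hcost1get : (phase1 m st).cost.get? s = some ((min t (Mval m s) : Nat) : Int) := by
    rw [h1cost, hcost0]
  -- the three remaining obligations, after done/cost are computed
  have hsets_goal : ∃ S, (phase2 (phase1 m st)).sets.get? s = some S ∧
      ∀ c, c ∈ S ↔ (1 ≤ t+1 ∧ c ∈ ballL m s (min ((t+1)-1) (Mval m s))) := by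
    refine ⟨S1, by rw [h2sets, hS1get], ?_⟩
    intro c
    rw [hS1mem c]
    have e : (t+1)-1 = t := by omega
    rw [e]
    constructor
    · intro hc; exact ⟨by omega, hc⟩
    · rintro ⟨_, hc⟩; exact hc
  have hppl_goal : ∃ q, (phase2 (phase1 m st)).ppl.get? s = some q ∧ (t+1 ≤ Mval m s →
      (∀ c ∈ q, c ∈ ballL m s (t+1)) ∧
      ∀ c, c ∈ ballL m s (t+1) → c ∈ q ∨ (1 ≤ t+1 ∧ c ∈ ballL m s ((t+1)-1))) := by
    refine ⟨q1, by rw [h2ppl, hq1get], ?_⟩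
    intro hguard
    obtain ⟨hb, hcov⟩ := hq1inv hguard
    refine ⟨hb, ?_⟩
    intro c hc
    rcases hcov c hc with hcq | hct
    · exact Or.inl hcq
    · refine Or.inr ⟨by omega, ?_⟩
      have e : (t+1)-1 = t := by omega
      rw [e]; exact hct
  by_cases hfr : Mval m s + 1 ≤ t
  · -- frozen before this round: nothing changes
    rw [if_pos (by rw [hgetD1done]; simpa using hfr)] at hpair2
    have hd : (phase2 (phase1 m st)).done.get? s = some (decide (Mval m s + 1 ≤ t)) :=
      (congrArg Prod.fst hpair2).trans hdone1get
    have hc : (phase2 (phase1 m st)).cost.get? s = some ((min t (Mval m s) : Nat) : Int) :=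
      (congrArg Prod.snd hpair2).trans hcost1get
    refine ⟨?_, ?_, hsets_goal, hppl_goal⟩
    · rw [hd]
      congr 1
      exact decide_eq_decide.mpr (by omega)
    · rw [hc]
      congr 2
      omega
  · -- active this round: evaluate the all-pairs intersection test
    have hle : t ≤ Mval m s := by omega
    rw [if_neg (by rw [hgetD1done]; simpa using hfr)] at hpair2
    have hSgetD : (phase1 m st).sets.getD s PySem.Set.empty = S1 := by
      rw [PySem.Dict.getD_eq_get?_getD, hS1get]; rfl
    have hcond_iff : ((phase1 m st).sets.values.all (fun x =>
        PySem.Set.len (PySem.Set.inter ((phase1 m st).sets.getD s PySem.Set.empty) x) > 0)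
          = true) ↔ Mval m s ≤ t := by
      rw [values_all_iff _ (peopleL m) h1ks hnd _ PySem.Set.empty]
      constructor
      · intro hall
        refine Mval_le m s t ?_
        intro s' hs'
        obtain ⟨⟨S1', hS1'get, hS1'mem⟩, _⟩ := key1 s' hs'
        have hS'getD : (phase1 m st).sets.getD s' PySem.Set.empty = S1' := by
          rw [PySem.Dict.getD_eq_get?_getD, hS1'get]; rfl
        have := hall s' hs'
        rw [hS'getD, hSgetD] at this
        have hex : ∃ c, c ∈ PySem.Set.inter S1 S1' := by
          rcases List.exists_mem_of_length_pos (by simpa [PySem.Set.len] using of_decide_eq_true this) with ⟨c, hc⟩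
          exact ⟨c, hc⟩
        rcases hex with ⟨c, hc⟩
        rcases (PySem.Set.mem_inter S1 S1' c).mp hc with ⟨hc1, hc2⟩
        have hb1 : c ∈ ballL m s t :=
          ballL_mono m s c _ t (by omega) ((hS1mem c).mp hc1)
        have hb2 : c ∈ ballL m s' t :=
          ballL_mono m s' c _ t (by omega) ((hS1'mem c).mp hc2)
        have hmeets : meetsB m s s' t = true := (meetsB_iff m s s' t).mpr ⟨c, hb1, hb2⟩
        by_contra hgt
        have := pMeet_min m s s' t (by omega)
        rw [this] at hmeets; exact absurd hmeets (by simp)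
      · intro hMt s' hs'
        obtain ⟨⟨S1', hS1'get, hS1'mem⟩, _⟩ := key1 s' hs'
        have hS'getD : (phase1 m st).sets.getD s' PySem.Set.empty = S1' := by
          rw [PySem.Dict.getD_eq_get?_getD, hS1'get]; rfl
        rw [hS'getD, hSgetD]
        have hpm := meetsB_pMeet m s s' (hp s hs s' hs')
        rcases (meetsB_iff m s s' _).mp hpm with ⟨c, hc1, hc2⟩
        have hple : pMeet m s s' ≤ Mval m s := pMeet_le_Mval m s s' hs'
        have hple' : pMeet m s s' ≤ Mval m s' := by
          rw [pMeet_symm m s s']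
          exact pMeet_le_Mval m s' s hs
        have hm1 : c ∈ ballL m s (min t (Mval m s)) :=
          ballL_mono m s c _ _ (by omega) hc1
        have hm2 : c ∈ ballL m s' (min t (Mval m s')) :=
          ballL_mono m s' c _ _ (by omega) hc2
        have hcmem : c ∈ PySem.Set.inter S1 S1' :=
          (PySem.Set.mem_inter S1 S1' c).mpr ⟨(hS1mem c).mpr hm1, (hS1'mem c).mpr hm2⟩
        have hlen : 0 < (PySem.Set.inter S1 S1').length :=
          List.length_pos_of_mem hcmem
        simpa [PySem.Set.len] using hlen
    by_cases hMt : Mval m s ≤ t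
    · rw [if_pos (hcond_iff.mpr hMt)] at hpair2
      have hd : (phase2 (phase1 m st)).done.get? s = some true := congrArg Prod.fst hpair2
      have hc : (phase2 (phase1 m st)).cost.get? s = some ((min t (Mval m s) : Nat) : Int) :=
        (congrArg Prod.snd hpair2).trans hcost1get
      refine ⟨?_, ?_, hsets_goal, hppl_goal⟩
      · rw [hd]
        congr 1
        exact (decide_eq_true (by omega)).symm
      · rw [hc]
        congr 2
        omega
    · rw [if_neg (fun hcond => hMt (hcond_iff.mp hcond))] at hpair2
      have hd : (phase2 (phase1 m st)).done.get? s = some (decide (Mval m s + 1 ≤ t)) :=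
        (congrArg Prod.fst hpair2).trans hdone1get
      have hgetDcost : (phase1 m st).cost.getD s 0 = ((min t (Mval m s) : Nat) : Int) := by
        rw [PySem.Dict.getD_eq_get?_getD, hcost1get]; rfl
      have hc : (phase2 (phase1 m st)).cost.get? s =
          some (((min t (Mval m s) : Nat) : Int) + 1) :=
        (congrArg Prod.snd hpair2).trans (by rw [hgetDcost])
      refine ⟨?_, ?_, hsets_goal, hppl_goal⟩
      · rw [hd]
        congr 1
        exact decide_eq_decide.mpr (by omega)
      · rw [hc]
        congr 1
        have e1 : min t (Mval m s) = t := by omega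
        have e2 : min (t+1) (Mval m s) = t+1 := by omega
        rw [e1, e2]
        push_cast
        ring

lemma invA_allDone (m : List (List Int)) (t : Nat) (st : AState) (h : InvA m t st) :
    (st.done.values.all (fun b => b) = true) ↔ ∀ s ∈ peopleL m, Mval m s + 1 ≤ t := by
  obtain ⟨_, _, _, hk4, hS⟩ := h
  rw [values_all_iff st.done (peopleL m) hk4 (nodup_peopleL m) (fun b => b) false]
  constructor
  · intro hall s hs
    have hd := (hS s hs).1
    have := hall s hs
    rw [PySem.Dict.getD_eq_get?_getD, hd] at this
    simpa using this
  · intro hall s hs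
    have hd := (hS s hs).1
    rw [PySem.Dict.getD_eq_get?_getD, hd]
    simpa using hall s hs

lemma loopA_spec (m : List (List Int))
    (hp : ∀ s ∈ peopleL m, ∀ s' ∈ peopleL m, meetsB m s s' (sumLen m) = true) :
    ∀ (f t : Nat) (st : AState), InvA m t st →
      (∀ s ∈ peopleL m, Mval m s + 1 ≤ t + f) →
      ∃ t', (∀ s ∈ peopleL m, Mval m s ≤ t') ∧ InvA m t' (loopA m f st) := by
  intro f
  induction f with
  | zero =>
    intro t st h hbound
    exact ⟨t, fun s hs => by have := hbound s hs; omega, h⟩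
  | succ f ih =>
    intro t st h hbound
    simp only [loopA]
    by_cases hall : st.done.values.all (fun b => b) = true
    · rw [if_pos hall]
      have := (invA_allDone m t st h).mp hall
      exact ⟨t, fun s hs => by have := this s hs; omega, h⟩
    · rw [if_neg hall]
      exact ih (t+1) _ (invA_step m hp t st h) (fun s hs => by have := hbound s hs; omega)

-- ---------- B: BFS ----------

def dval (m : List (List Int)) (s c : Int × Int) : Nat :=
  lfind (fun r => decide (c ∈ ballL m s r)) 0 (sumLen m + 1)

lemma dval_spec (m : List (List Int)) (s c : Int × Int) (r : Nat) (hr : r ≤ sumLen m + 1)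
    (hc : c ∈ ballL m s r) :
    dval m s c ≤ r ∧ c ∈ ballL m s (dval m s c) := by
  have hf : (fun r => decide (c ∈ ballL m s r)) (0 + r) = true := by
    simpa using hc
  have := lfind_true (fun r => decide (c ∈ ballL m s r)) (sumLen m + 1) 0 r hf (by omega)
  refine ⟨by simpa [dval] using this.2, ?_⟩
  have h1 := this.1
  simpa [dval] using h1

def okPos (m : List (List Int)) (x : Int × Int) : Prop :=
  x.1 ≥ 0 ∧ x.2 ≥ 0 ∧ x.1 < (m.length : Int) ∧ x.2 < ((m.headD []).length : Int) ∧
  PySem.List.pyGetD (PySem.List.pyGetD m x.1 []) x.2 0 ≠ 1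

lemma mem_getNeighbors (m : List (List Int)) (i j : Int) (x : Int × Int) :
    x ∈ getNeighbors i j m ↔
      ((x = (i+1, j) ∨ x = (i-1, j) ∨ x = (i, j+1) ∨ x = (i, j-1)) ∧ okPos m x) := by
  have e : getNeighbors i j m =
      [] ++ (([((1:Int),(0:Int)),(-1,0),(0,1),(0,-1)] : List (Int × Int)).filter (fun d =>
        decide (i + d.1 ≥ 0 ∧ j + d.2 ≥ 0 ∧ i + d.1 < (m.length : Int) ∧
          j + d.2 < ((m.headD []).length : Int) ∧
          PySem.List.pyGetD (PySem.List.pyGetD m (i + d.1) []) (j + d.2) 0 ≠ 1))).map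
        (fun d => (i + d.1, j + d.2)) :=
    PySem.List.foldl_append_ite _ _ _ []
  rw [e, List.nil_append]
  simp only [List.mem_map, List.mem_filter]
  constructor
  · rintro ⟨d, ⟨hmem, hc⟩, rfl⟩
    have hcp := of_decide_eq_true hc
    simp only [List.mem_cons] at hmem
    rcases hmem with rfl | rfl | rfl | rfl | h
    · exact ⟨Or.inl (by simp), by simpa [okPos] using hcp⟩
    · exact ⟨Or.inr (Or.inl (by simp [sub_eq_add_neg])), by simpa [okPos] using hcp⟩
    · exact ⟨Or.inr (Or.inr (Or.inl (by simp))), by simpa [okPos] using hcp⟩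
    · exact ⟨Or.inr (Or.inr (Or.inr (by simp [sub_eq_add_neg]))), by simpa [okPos] using hcp⟩
    · simp at h
  · rintro ⟨hx, hok⟩
    rcases hx with rfl | rfl | rfl | rfl
    · refine ⟨(1, 0), ⟨by simp, ?_⟩, by simp⟩
      apply decide_eq_true
      simpa [okPos] using hok
    · refine ⟨(-1, 0), ⟨by simp, ?_⟩, by simp [sub_eq_add_neg]⟩
      apply decide_eq_true
      simpa [okPos, sub_eq_add_neg] using hok
    · refine ⟨(0, 1), ⟨by simp, ?_⟩, by simp⟩
      apply decide_eq_true
      simpa [okPos] using hok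
    · refine ⟨(0, -1), ⟨by simp, ?_⟩, by simp [sub_eq_add_neg]⟩
      apply decide_eq_true
      simpa [okPos, sub_eq_add_neg] using hok

def QB (m : List (List Int)) (p : Int × Int) (r : Nat)
    (st : PySem.Dict (Int × Int) Int × List (Int × Int)) : Prop :=
  st.1.keys.Nodup ∧
  (∀ c, st.1.contains c = true ↔ c ∈ ballL m p r) ∧
  (∀ c v, st.1.get? c = some v → v = (dval m p c : Nat)) ∧
  (∀ c, c ∈ st.2 ↔ (c ∈ ballL m p r ∧ (r = 0 ∨ c ∉ ballL m p (r-1))))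

abbrev condC (m : List (List Int)) (C : Int) (x : Int × Int) : Prop :=
  x.1 ≥ 0 ∧ x.2 ≥ 0 ∧ x.1 < (m.length : Int) ∧ x.2 < C ∧
  PySem.List.pyGetD (PySem.List.pyGetD m x.1 []) x.2 0 ≠ 1

set_option maxHeartbeats 1000000 in
lemma cellfold (m : List (List Int)) (C : Int) (w : Int) (c : Int × Int) :
    ∀ (dirs : List (Int × Int)) (st2 : PySem.Dict (Int × Int) Int × List (Int × Int)),
      st2.1.keys.Nodup →
      ((dirs.foldl (fun st3 dd =>
        let ni := c.1 + dd.1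
        let nj := c.2 + dd.2
        if ni ≥ 0 ∧ nj ≥ 0 ∧ ni < (m.length : Int) ∧ nj < C ∧
            PySem.List.pyGetD (PySem.List.pyGetD m ni []) nj 0 ≠ 1 ∧
            ¬ (st3.1.contains (ni, nj) = true)
        then (st3.1.insert (ni, nj) w, st3.2 ++ [(ni, nj)]) else st3) st2).1.keys.Nodup) ∧
      (∀ x, (dirs.foldl (fun st3 dd =>
        let ni := c.1 + dd.1
        let nj := c.2 + dd.2
        if ni ≥ 0 ∧ nj ≥ 0 ∧ ni < (m.length : Int) ∧ nj < C ∧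
            PySem.List.pyGetD (PySem.List.pyGetD m ni []) nj 0 ≠ 1 ∧
            ¬ (st3.1.contains (ni, nj) = true)
        then (st3.1.insert (ni, nj) w, st3.2 ++ [(ni, nj)]) else st3) st2).1.get? x =
          if (∃ dd ∈ dirs, x = (c.1 + dd.1, c.2 + dd.2) ∧ condC m C x) ∧
              st2.1.contains x = false
          then some w else st2.1.get? x) ∧
      (∀ x, x ∈ (dirs.foldl (fun st3 dd =>
        let ni := c.1 + dd.1
        let nj := c.2 + dd.2
        if ni ≥ 0 ∧ nj ≥ 0 ∧ ni < (m.length : Int) ∧ nj < C ∧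
            PySem.List.pyGetD (PySem.List.pyGetD m ni []) nj 0 ≠ 1 ∧
            ¬ (st3.1.contains (ni, nj) = true)
        then (st3.1.insert (ni, nj) w, st3.2 ++ [(ni, nj)]) else st3) st2).2 ↔
          x ∈ st2.2 ∨ ((∃ dd ∈ dirs, x = (c.1 + dd.1, c.2 + dd.2) ∧ condC m C x) ∧
            st2.1.contains x = false)) := by
  intro dirs
  induction dirs with
  | nil =>
    intro st2 hnd
    refine ⟨hnd, fun x => ?_, fun x => ?_⟩ <;> simp
  | cons dd rest ih =>
    intro st2 hnd
    simp only [List.foldl_cons]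
    by_cases hbr : (c.1 + dd.1 ≥ 0 ∧ c.2 + dd.2 ≥ 0 ∧ c.1 + dd.1 < (m.length : Int) ∧
        c.2 + dd.2 < C ∧
        PySem.List.pyGetD (PySem.List.pyGetD m (c.1 + dd.1) []) (c.2 + dd.2) 0 ≠ 1 ∧
        ¬ (st2.1.contains (c.1 + dd.1, c.2 + dd.2) = true))
    · rw [if_pos hbr]
      obtain ⟨hc1, hc2, hc3, hc4, hc5, hc6⟩ := hbr
      have hpos : condC m C (c.1 + dd.1, c.2 + dd.2) := ⟨hc1, hc2, hc3, hc4, hc5⟩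
      obtain ⟨ihnd, ihget, ihmem⟩ :=
        ih (st2.1.insert (c.1 + dd.1, c.2 + dd.2) w, st2.2 ++ [(c.1 + dd.1, c.2 + dd.2)])
          (PySem.Dict.nodup_keys_insert st2.1 _ w hnd)
      refine ⟨ihnd, fun x => ?_, fun x => ?_⟩
      · rw [ihget x]
        by_cases hx : x = (c.1 + dd.1, c.2 + dd.2)
        · subst hx
          rw [if_neg (by
            rintro ⟨_, hcontains⟩
            rw [show (st2.1.insert (c.1 + dd.1, c.2 + dd.2) w,
                st2.2 ++ [(c.1 + dd.1, c.2 + dd.2)]).1 =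
                st2.1.insert (c.1 + dd.1, c.2 + dd.2) w from rfl,
              PySem.Dict.contains_insert_self] at hcontains
            exact absurd hcontains (by simp))]
          rw [show (st2.1.insert (c.1 + dd.1, c.2 + dd.2) w,
              st2.2 ++ [(c.1 + dd.1, c.2 + dd.2)]).1 =
              st2.1.insert (c.1 + dd.1, c.2 + dd.2) w from rfl,
            PySem.Dict.get?_insert_self,
            if_pos ⟨⟨dd, by simp, rfl, hpos⟩, by simpa using hc6⟩]
        · have hcontains_eq : (st2.1.insert (c.1 + dd.1, c.2 + dd.2) w).contains x =
              st2.1.contains x := by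
            rw [PySem.Dict.contains_insert]
            simp [hx]
          have hget_eq : (st2.1.insert (c.1 + dd.1, c.2 + dd.2) w).get? x = st2.1.get? x :=
            PySem.Dict.get?_insert_of_ne _ _ hx
          show (if (∃ dd' ∈ rest, x = (c.1 + dd'.1, c.2 + dd'.2) ∧ condC m C x) ∧
              (st2.1.insert (c.1 + dd.1, c.2 + dd.2) w).contains x = false
            then some w else (st2.1.insert (c.1 + dd.1, c.2 + dd.2) w).get? x) = _
          rw [hcontains_eq, hget_eq]
          congr 1
          apply propext
          constructor
          · rintro ⟨⟨dd', hdd', hx', hcond⟩, hcf⟩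
            exact ⟨⟨dd', by simp [hdd'], hx', hcond⟩, hcf⟩
          · rintro ⟨⟨dd', hdd', hx', hcond⟩, hcf⟩
            rcases List.mem_cons.mp hdd' with rfl | hdd'
            · exact absurd hx' hx
            · exact ⟨⟨dd', hdd', hx', hcond⟩, hcf⟩
      · rw [ihmem x]
        show x ∈ st2.2 ++ [(c.1 + dd.1, c.2 + dd.2)] ∨
            ((∃ dd' ∈ rest, x = (c.1 + dd'.1, c.2 + dd'.2) ∧ condC m C x) ∧
              (st2.1.insert (c.1 + dd.1, c.2 + dd.2) w).contains x = false) ↔ _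
        simp only [List.mem_append, List.mem_singleton]
        constructor
        · rintro ((hx | hx) | ⟨⟨dd', hdd', hx', hcond⟩, hcf⟩)
          · exact Or.inl hx
          · exact Or.inr ⟨⟨dd, by simp, hx, hx ▸ hpos⟩, by subst hx; simpa using hc6⟩
          · rw [PySem.Dict.contains_insert] at hcf
            have hxne : x ≠ (c.1 + dd.1, c.2 + dd.2) := by
              intro he; rw [he] at hcf; simp at hcf
            refine Or.inr ⟨⟨dd', by simp [hdd'], hx', hcond⟩, ?_⟩
            simpa [hxne] using hcf
        · rintro (hx | ⟨⟨dd', hdd', hx', hcond⟩, hcf⟩)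
          · exact Or.inl (Or.inl hx)
          · rcases List.mem_cons.mp hdd' with rfl | hdd'
            · exact Or.inl (Or.inr hx')
            · by_cases hxe : x = (c.1 + dd.1, c.2 + dd.2)
              · exact Or.inl (Or.inr hxe)
              · refine Or.inr ⟨⟨dd', hdd', hx', hcond⟩, ?_⟩
                rw [PySem.Dict.contains_insert]
                simpa [hxe] using hcf
    · rw [if_neg hbr]
      obtain ⟨ihnd, ihget, ihmem⟩ := ih st2 hnd
      have hsplit : ∀ x, ((∃ dd' ∈ dd :: rest, x = (c.1 + dd'.1, c.2 + dd'.2) ∧ condC m C x) ∧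
          st2.1.contains x = false) ↔
          ((∃ dd' ∈ rest, x = (c.1 + dd'.1, c.2 + dd'.2) ∧ condC m C x) ∧
          st2.1.contains x = false) := by
        intro x
        constructor
        · rintro ⟨⟨dd', hdd', hx', hcond⟩, hcf⟩
          rcases List.mem_cons.mp hdd' with rfl | hdd'
          · exfalso
            apply hbr
            rw [hx'] at hcond hcf
            obtain ⟨h1, h2, h3, h4, h5⟩ := hcond
            exact ⟨h1, h2, h3, h4, h5, by simp [hcf]⟩
          · exact ⟨⟨dd', hdd', hx', hcond⟩, hcf⟩
        · rintro ⟨⟨dd', hdd', hx', hcond⟩, hcf⟩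
          exact ⟨⟨dd', by simp [hdd'], hx', hcond⟩, hcf⟩
      refine ⟨ihnd, fun x => ?_, fun x => ?_⟩
      · rw [ihget x]
        congr 1
        exact propext (hsplit x).symm
      · rw [ihmem x, hsplit x]

set_option maxHeartbeats 1000000 in
lemma frontfold (m : List (List Int)) (w : Int) :
    ∀ (F : List (Int × Int)) (st0 : PySem.Dict (Int × Int) Int × List (Int × Int)),
      st0.1.keys.Nodup →
      ((F.foldl (fun st2 c =>
        ([((1:Int),(0:Int)),(-1,0),(0,1),(0,-1)] : List (Int × Int)).foldl (fun st3 dd =>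
          let ni := c.1 + dd.1
          let nj := c.2 + dd.2
          if ni ≥ 0 ∧ nj ≥ 0 ∧ ni < (m.length : Int) ∧ nj < ((m.headD []).length : Int) ∧
              PySem.List.pyGetD (PySem.List.pyGetD m ni []) nj 0 ≠ 1 ∧
              ¬ (st3.1.contains (ni, nj) = true)
          then (st3.1.insert (ni, nj) w, st3.2 ++ [(ni, nj)]) else st3) st2) st0).1.keys.Nodup) ∧
      (∀ x, (F.foldl (fun st2 c =>
        ([((1:Int),(0:Int)),(-1,0),(0,1),(0,-1)] : List (Int × Int)).foldl (fun st3 dd =>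
          let ni := c.1 + dd.1
          let nj := c.2 + dd.2
          if ni ≥ 0 ∧ nj ≥ 0 ∧ ni < (m.length : Int) ∧ nj < ((m.headD []).length : Int) ∧
              PySem.List.pyGetD (PySem.List.pyGetD m ni []) nj 0 ≠ 1 ∧
              ¬ (st3.1.contains (ni, nj) = true)
          then (st3.1.insert (ni, nj) w, st3.2 ++ [(ni, nj)]) else st3) st2) st0).1.get? x =
          if (∃ c ∈ F, x ∈ getNeighbors c.1 c.2 m) ∧ st0.1.contains x = false
          then some w else st0.1.get? x) ∧
      (∀ x, x ∈ (F.foldl (fun st2 c =>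
        ([((1:Int),(0:Int)),(-1,0),(0,1),(0,-1)] : List (Int × Int)).foldl (fun st3 dd =>
          let ni := c.1 + dd.1
          let nj := c.2 + dd.2
          if ni ≥ 0 ∧ nj ≥ 0 ∧ ni < (m.length : Int) ∧ nj < ((m.headD []).length : Int) ∧
              PySem.List.pyGetD (PySem.List.pyGetD m ni []) nj 0 ≠ 1 ∧
              ¬ (st3.1.contains (ni, nj) = true)
          then (st3.1.insert (ni, nj) w, st3.2 ++ [(ni, nj)]) else st3) st2) st0).2 ↔
          x ∈ st0.2 ∨ ((∃ c ∈ F, x ∈ getNeighbors c.1 c.2 m) ∧ st0.1.contains x = false)) := by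
  have hnbr_iff : ∀ (c x : Int × Int),
      (∃ dd ∈ ([((1:Int),(0:Int)),(-1,0),(0,1),(0,-1)] : List (Int × Int)),
        x = (c.1 + dd.1, c.2 + dd.2) ∧ condC m ((m.headD []).length : Int) x) ↔
      x ∈ getNeighbors c.1 c.2 m := by
    intro c x
    rw [mem_getNeighbors]
    constructor
    · rintro ⟨dd, hdd, hx, hcond⟩
      refine ⟨?_, hcond⟩
      simp only [List.mem_cons] at hdd
      rcases hdd with rfl | rfl | rfl | rfl | hdd
      · exact Or.inl (by simp [hx])
      · exact Or.inr (Or.inl (by simp [hx, sub_eq_add_neg]))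
      · exact Or.inr (Or.inr (Or.inl (by simp [hx])))
      · exact Or.inr (Or.inr (Or.inr (by simp [hx, sub_eq_add_neg])))
      · simp at hdd
    · rintro ⟨hx, hcond⟩
      rcases hx with rfl | rfl | rfl | rfl
      · exact ⟨(1, 0), by simp, by simp, hcond⟩
      · exact ⟨(-1, 0), by simp, by simp [sub_eq_add_neg], hcond⟩
      · exact ⟨(0, 1), by simp, by simp, hcond⟩
      · exact ⟨(0, -1), by simp, by simp [sub_eq_add_neg], hcond⟩
  intro F
  induction F with
  | nil =>
    intro st0 hnd
    refine ⟨hnd, fun x => ?_, fun x => ?_⟩ <;> simp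
  | cons c F ih =>
    intro st0 hnd
    obtain ⟨cnd, cget, cmem⟩ :=
      cellfold m ((m.headD []).length : Int) w c
        [((1:Int),(0:Int)),(-1,0),(0,1),(0,-1)] st0 hnd
    obtain ⟨ihnd, ihget, ihmem⟩ := ih _ cnd
    refine ⟨ihnd, fun x => ?_, fun x => ?_⟩
    · rw [List.foldl_cons, ihget x]
      have hcontains : ∀ x, (([((1:Int),(0:Int)),(-1,0),(0,1),(0,-1)] :
          List (Int × Int)).foldl (fun st3 dd =>
          let ni := c.1 + dd.1
          let nj := c.2 + dd.2
          if ni ≥ 0 ∧ nj ≥ 0 ∧ ni < (m.length : Int) ∧ nj < ((m.headD []).length : Int) ∧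
              PySem.List.pyGetD (PySem.List.pyGetD m ni []) nj 0 ≠ 1 ∧
              ¬ (st3.1.contains (ni, nj) = true)
          then (st3.1.insert (ni, nj) w, st3.2 ++ [(ni, nj)]) else st3) st0).1.contains x =
          false ↔ (¬ x ∈ getNeighbors c.1 c.2 m) ∧ st0.1.contains x = false := by
        intro y
        by_cases hy : y ∈ getNeighbors c.1 c.2 m
        · by_cases hyc : st0.1.contains y = false
          · have hsome := (cget y).trans (if_pos ⟨(hnbr_iff c y).mpr hy, hyc⟩)
            rw [PySem.Dict.contains_eq_isSome_get?, hsome]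
            simp [hy]
          · have hnone := (cget y).trans (if_neg (fun hc => hyc hc.2))
            rw [PySem.Dict.contains_eq_isSome_get?, hnone,
              ← PySem.Dict.contains_eq_isSome_get?]
            simp only [Bool.not_eq_false] at hyc
            simp [hyc, hy]
        · have hnone := (cget y).trans (if_neg (fun hc => hy ((hnbr_iff c y).mp hc.1)))
          rw [PySem.Dict.contains_eq_isSome_get?, hnone,
            ← PySem.Dict.contains_eq_isSome_get?]
          simp [hy]
      split_ifs with h1 h2 h2
      · rfl
      · exfalso
        obtain ⟨⟨c', hc', hn⟩, hcf⟩ := h1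
        rw [hcontains x] at hcf
        exact h2 ⟨⟨c', by simp [hc'], hn⟩, hcf.2⟩
      · obtain ⟨⟨c', hc', hn⟩, hcf⟩ := h2
        by_cases hxc : x ∈ getNeighbors c.1 c.2 m
        · rw [cget x, if_pos ⟨(hnbr_iff c x).mpr hxc, hcf⟩]
        · exfalso
          rcases List.mem_cons.mp hc' with rfl | hc'
          · exact hxc hn
          · exact h1 ⟨⟨c', hc', hn⟩, (hcontains x).mpr ⟨hxc, hcf⟩⟩
      · rw [cget x, if_neg (by
          rintro ⟨hdd, hst0⟩
          exact h2 ⟨⟨c, by simp, (hnbr_iff c x).mp hdd⟩, hst0⟩)]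
    · rw [List.foldl_cons, ihmem x]
      have hcontains := (PySem.Dict.contains_eq_isSome_get?
          (d := (([((1:Int),(0:Int)),(-1,0),(0,1),(0,-1)] : List (Int × Int)).foldl
            (fun st3 dd =>
            let ni := c.1 + dd.1
            let nj := c.2 + dd.2
            if ni ≥ 0 ∧ nj ≥ 0 ∧ ni < (m.length : Int) ∧ nj < ((m.headD []).length : Int) ∧
                PySem.List.pyGetD (PySem.List.pyGetD m ni []) nj 0 ≠ 1 ∧
                ¬ (st3.1.contains (ni, nj) = true)
            then (st3.1.insert (ni, nj) w, st3.2 ++ [(ni, nj)]) else st3) st0).1) (k := x))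
      rw [cmem x]
      constructor
      · rintro ((hx | ⟨hdd, hcf⟩) | ⟨⟨c', hc', hn⟩, hcf⟩)
        · exact Or.inl hx
        · exact Or.inr ⟨⟨c, by simp, (hnbr_iff c x).mp hdd⟩, hcf⟩
        · rw [hcontains, cget x] at hcf
          by_cases hcc : (∃ dd ∈ ([((1:Int),(0:Int)),(-1,0),(0,1),(0,-1)] :
              List (Int × Int)), x = (c.1 + dd.1, c.2 + dd.2) ∧
                condC m ((m.headD []).length : Int) x) ∧ st0.1.contains x = false
          · rw [if_pos hcc] at hcf; simp at hcf
          · rw [if_neg hcc] at hcf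
            rw [← PySem.Dict.contains_eq_isSome_get?] at hcf
            refine Or.inr ⟨⟨c', by simp [hc'], hn⟩, ?_⟩
            simpa using hcf
      · rintro (hx | ⟨⟨c', hc', hn⟩, hcf⟩)
        · exact Or.inl (Or.inl hx)
        · rcases List.mem_cons.mp hc' with rfl | hc'
          · exact Or.inl (Or.inr ⟨(hnbr_iff c' x).mpr hn, hcf⟩)
          · by_cases hxc : x ∈ getNeighbors c.1 c.2 m
            · exact Or.inl (Or.inr ⟨(hnbr_iff c x).mpr hxc, hcf⟩)
            · refine Or.inr ⟨⟨c', hc', hn⟩, ?_⟩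
              rw [hcontains, cget x,
                if_neg (by rintro ⟨h, _⟩; exact hxc ((hnbr_iff c x).mp h))]
              rw [← PySem.Dict.contains_eq_isSome_get?]
              exact hcf

set_option maxHeartbeats 1000000 in
lemma bRound_spec (m : List (List Int)) (p : Int × Int) (r : Nat) (hr : r + 1 ≤ sumLen m + 1)
    (st : PySem.Dict (Int × Int) Int × List (Int × Int)) (h : QB m p r st) :
    QB m p (r+1) (bRound m ((m.headD []).length : Int) ((r : Int)+1) st) := by
  obtain ⟨hnd, hcont, hval, hfront⟩ := h
  obtain ⟨fnd, fget, fmem⟩ := frontfold m ((r : Int)+1) st.2 (st.1, []) hnd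
  have hcontains' : ∀ x, (bRound m ((m.headD []).length : Int) ((r : Int)+1) st).1.contains x
      = true ↔ (x ∈ ballL m p r ∨
        ((∃ c ∈ st.2, x ∈ getNeighbors c.1 c.2 m) ∧ st.1.contains x = false)) := by
    intro x
    rw [PySem.Dict.contains_eq_isSome_get?]
    simp only [bRound]
    rw [fget x]
    by_cases hcc : (∃ c ∈ st.2, x ∈ getNeighbors c.1 c.2 m) ∧ st.1.contains x = false
    · rw [if_pos hcc]; simp [hcc]
    · rw [if_neg hcc]
      rw [← PySem.Dict.contains_eq_isSome_get?, hcont x]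
      constructor
      · exact Or.inl
      · rintro (hb | hnew)
        · exact hb
        · exact absurd hnew hcc
  have hball_iff : ∀ x, (x ∈ ballL m p r ∨
      ((∃ c ∈ st.2, x ∈ getNeighbors c.1 c.2 m) ∧ st.1.contains x = false)) ↔
      x ∈ ballL m p (r+1) := by
    intro x
    constructor
    · rintro (hb | ⟨⟨c, hc, hn⟩, _⟩)
      · exact ballL_mono m p x r (r+1) (by omega) hb
      · exact (mem_ballL_succ m p x r).mpr (Or.inr ⟨c, ((hfront c).mp hc).1, hn⟩)
    · intro hb
      by_cases hbr : x ∈ ballL m p r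
      · exact Or.inl hbr
      · obtain ⟨c', hc't, hcond, hnbr⟩ := ballL_shell m p x r hb hbr
        refine Or.inr ⟨⟨c', (hfront c').mpr ⟨hc't, hcond⟩, hnbr⟩, ?_⟩
        rw [← Bool.not_eq_true, hcont x]
        exact hbr
  refine ⟨fnd, ?_, ?_, ?_⟩
  · intro c
    rw [hcontains' c, hball_iff c]
  · intro c v hv
    simp only [bRound] at hv
    rw [fget c] at hv
    by_cases hcc : (∃ c' ∈ st.2, c ∈ getNeighbors c'.1 c'.2 m) ∧ st.1.contains c = false
    · rw [if_pos hcc] at hv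
      have hnew : c ∈ ballL m p (r+1) := (hball_iff c).mp (Or.inr hcc)
      have hold : c ∉ ballL m p r := by
        rw [← hcont c]
        simp [hcc.2]
      have hd := dval_spec m p c (r+1) (by omega) hnew
      have : ¬ dval m p c ≤ r := fun hle =>
        hold (ballL_mono m p c _ r hle hd.2)
      have hdv : dval m p c = r + 1 := by omega
      have hveq : v = (r : Int) + 1 := (Option.some.inj hv).symm
      rw [hveq, hdv]
      push_cast
      ring
    · rw [if_neg hcc] at hv
      exact hval c v hv
  · intro c
    simp only [bRound]
    rw [fmem c]
    constructor
    · rintro (hc | ⟨⟨c', hc', hn⟩, hcf⟩)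
      · simp at hc
      · have hnew : c ∈ ballL m p (r+1) :=
          (hball_iff c).mp (Or.inr ⟨⟨c', hc', hn⟩, hcf⟩)
        refine ⟨hnew, Or.inr ?_⟩
        have : (r+1) - 1 = r := by omega
        rw [this, ← hcont c]
        simp [hcf]
    · rintro ⟨hb, hcond⟩
      have hr1 : (r+1) - 1 = r := by omega
      rw [hr1] at hcond
      have hbr : c ∉ ballL m p r := by
        rcases hcond with h0 | h
        · omega
        · exact h
      obtain ⟨c', hc't, hcond', hnbr⟩ := ballL_shell m p c r hb hbr
      refine Or.inr ⟨⟨c', (hfront c').mpr ⟨hc't, hcond'⟩, hnbr⟩, ?_⟩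
      rw [← Bool.not_eq_true, hcont c]
      exact hbr

lemma bBFS_spec (m : List (List Int)) (p : Int × Int) :
    (∀ c, (bBFS m (sumLen m) ((m.headD []).length : Int) p).contains c = true ↔
        c ∈ ballL m p (sumLen m)) ∧
    (∀ c v, (bBFS m (sumLen m) ((m.headD []).length : Int) p).get? c = some v →
        v = (dval m p c : Nat)) ∧
    (bBFS m (sumLen m) ((m.headD []).length : Int) p).keys.Nodup := by
  have main : ∀ k : Nat, k ≤ sumLen m →
      QB m p k ((PySem.List.pyRange 1 ((k : Int)+1) 1).foldl
        (fun st d => bRound m ((m.headD []).length : Int) d st)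
        (PySem.Dict.empty.insert p 0, [p])) := by
    intro k
    induction k with
    | zero =>
      intro _
      rw [show ((0 : Nat) : Int) + 1 = 1 by norm_num,
        PySem.List.pyRange_one_eq_nil (by omega)]
      simp only [List.foldl_nil]
      have hdvp : dval m p p = 0 := by
        have h0 : (fun r => decide (p ∈ ballL m p r)) 0 = true := by
          simp [self_mem_ballL]
        simp [dval, lfind, h0]
      refine ⟨?_, ?_, ?_, ?_⟩
      · exact PySem.Dict.nodup_keys_insert _ _ _ (by simp)
      · intro c
        rw [PySem.Dict.contains_insert, mem_ballL_zero]
        simp [PySem.Dict.empty]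
      · intro c v hv
        rw [PySem.Dict.get?_insert] at hv
        by_cases hc : c = p
        · rw [if_pos hc] at hv
          cases hv
          rw [hc, hdvp]
          simp
        · rw [if_neg hc] at hv
          simp [PySem.Dict.empty, PySem.Dict.get?] at hv
      · intro c
        simp only [List.mem_singleton]
        rw [mem_ballL_zero]
        simp
    | succ k ih =>
      intro hk
      have hcast : ((k+1 : Nat) : Int) + 1 = (((k : Int) + 1)) + 1 := by push_cast; ring
      rw [hcast, PySem.List.pyRange_one_succ_right (by omega), List.foldl_append]
      simp only [List.foldl_cons, List.foldl_nil]
      exact bRound_spec m p k (by omega) _ (ih (by omega))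
  have hfin := main (sumLen m) (le_refl _)
  obtain ⟨hnd, hcont, hval, _⟩ := hfin
  refine ⟨?_, ?_, ?_⟩
  · intro c
    rw [show bBFS m (sumLen m) ((m.headD []).length : Int) p =
      ((PySem.List.pyRange 1 (((sumLen m : Nat) : Int)+1) 1).foldl
        (fun st d => bRound m ((m.headD []).length : Int) d st)
        (PySem.Dict.empty.insert p 0, [p])).1 from rfl]
    exact hcont c
  · intro c v
    rw [show bBFS m (sumLen m) ((m.headD []).length : Int) p =
      ((PySem.List.pyRange 1 (((sumLen m : Nat) : Int)+1) 1).foldl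
        (fun st d => bRound m ((m.headD []).length : Int) d st)
        (PySem.Dict.empty.insert p 0, [p])).1 from rfl]
    exact hval c v
  · rw [show bBFS m (sumLen m) ((m.headD []).length : Int) p =
      ((PySem.List.pyRange 1 (((sumLen m : Nat) : Int)+1) 1).foldl
        (fun st d => bRound m ((m.headD []).length : Int) d st)
        (PySem.Dict.empty.insert p 0, [p])).1 from rfl]
    exact hnd

lemma optminfold {α : Type} (q : α → Bool) (g : α → Int) (P : Int) :
    ∀ (L : List α) (acc : Option Int),
      (∀ x ∈ L, q x = true → P ≤ g x) →
      (acc = none ∨ ∃ w, acc = some w ∧ P ≤ w) →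
      ((∃ x ∈ L, q x = true ∧ g x ≤ P) ∨ (∃ w, acc = some w ∧ w ≤ P)) →
      L.foldl (fun macc x => if q x then
        (if macc.isNone ∨ g x < macc.getD 0 then some (g x) else macc) else macc) acc
        = some P := by
  intro L
  induction L with
  | nil =>
    intro acc _ hlbacc hat
    rcases hat with ⟨x, hx, _⟩ | ⟨w, hacc, hwP⟩
    · simp at hx
    · rcases hlbacc with h | ⟨w', hacc', hPw⟩
      · rw [h] at hacc; cases hacc
      · rw [hacc'] at hacc ⊢
        cases hacc
        simp only [List.foldl_nil]
        congr 1
        omega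
  | cons y L ih =>
    intro acc hlb hlbacc hat
    simp only [List.foldl_cons]
    by_cases hq : q y = true
    · rw [if_pos hq]
      have hPgy : P ≤ g y := hlb y (by simp) hq
      by_cases hn : (acc.isNone = true ∨ g y < acc.getD 0)
      · rw [if_pos hn]
        refine ih (some (g y)) (fun x hx hqx => hlb x (by simp [hx]) hqx)
          (Or.inr ⟨g y, rfl, hPgy⟩) ?_
        rcases hat with ⟨x, hx, hqx, hgx⟩ | ⟨w, hacc, hwP⟩
        · rcases List.mem_cons.mp hx with rfl | hx'
          · exact Or.inr ⟨g x, rfl, hgx⟩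
          · exact Or.inl ⟨x, hx', hqx, hgx⟩
        · rcases hn with hnone | hlt
          · rw [hacc] at hnone; simp at hnone
          · rw [hacc] at hlt
            simp only [Option.getD_some] at hlt
            exact Or.inr ⟨g y, rfl, by omega⟩
      · rw [if_neg hn]
        rw [not_or] at hn
        have hnn : acc.isNone ≠ true := fun h => by simp [h] at hn
        obtain ⟨w, hacc⟩ : ∃ w, acc = some w := by
          cases acc with
          | none => simp at hnn
          | some w => exact ⟨w, rfl⟩
        have hwgy : w ≤ g y := by
          have := hn.2
          rw [hacc] at this
          simpa using this
        refine ih acc (fun x hx hqx => hlb x (by simp [hx]) hqx) hlbacc ?_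
        rcases hat with ⟨x, hx, hqx, hgx⟩ | ⟨w', hacc', hwP⟩
        · rcases List.mem_cons.mp hx with rfl | hx'
          · exact Or.inr ⟨w, hacc, by omega⟩
          · exact Or.inl ⟨x, hx', hqx, hgx⟩
        · exact Or.inr ⟨w', hacc', hwP⟩
    · rw [if_neg hq]
      refine ih acc (fun x hx hqx => hlb x (by simp [hx]) hqx) hlbacc ?_
      rcases hat with ⟨x, hx, hqx, hgx⟩ | h
      · rcases List.mem_cons.mp hx with rfl | hx'
        · exact absurd hqx hq
        · exact Or.inl ⟨x, hx', hqx, hgx⟩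
      · exact Or.inr h

lemma pairFold_spec (m : List (List Int)) (a b : Int × Int)
    (hp : meetsB m a b (sumLen m) = true) :
    ((bBFS m (sumLen m) ((m.headD []).length : Int) a).items.foldl
      (fun (acc : Option Int) cv =>
        if (bBFS m (sumLen m) ((m.headD []).length : Int) b).contains cv.1 then
          let v := max cv.2 ((bBFS m (sumLen m) ((m.headD []).length : Int) b).getD cv.1 0)
          if acc.isNone ∨ v < acc.getD 0 then some v else acc
        else acc) none) = some ((pMeet m a b : Nat) : Int) := by
  obtain ⟨hacont, haval, hand⟩ := bBFS_spec m a
  obtain ⟨hbcont, hbval, hbnd⟩ := bBFS_spec m b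
  have hitem : ∀ cv ∈ (bBFS m (sumLen m) ((m.headD []).length : Int) a).items,
      (bBFS m (sumLen m) ((m.headD []).length : Int) a).get? cv.1 = some cv.2 := by
    intro cv hcv
    exact ((PySem.Dict.get?_eq_some_iff_mem_items _ cv.1 cv.2 hand).mpr (by
      rcases cv with ⟨c, v⟩; exact hcv))
  have hbgetD : ∀ c, (bBFS m (sumLen m) ((m.headD []).length : Int) b).contains c = true →
      (bBFS m (sumLen m) ((m.headD []).length : Int) b).getD c 0 = ((dval m b c : Nat) : Int) := by
    intro c hc
    rw [PySem.Dict.contains_eq_isSome_get?] at hc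
    rcases Option.isSome_iff_exists.mp hc with ⟨w, hw⟩
    rw [PySem.Dict.getD_eq_get?_getD, hw]
    exact hbval c w hw
  refine optminfold _ _ _ _ none ?_ (Or.inl rfl) ?_
  · -- every common cell meets at radius max of the two distances
    rintro ⟨c, v⟩ hcv hqc
    have hga := hitem _ hcv
    have hva : v = ((dval m a c : Nat) : Int) := haval c v hga
    have hca : c ∈ ballL m a (sumLen m) := by
      rw [← hacont c, PySem.Dict.contains_eq_isSome_get?, hga]; rfl
    have hcb : c ∈ ballL m b (sumLen m) := (hbcont c).mp hqc
    have hda := dval_spec m a c (sumLen m) (by omega) hca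
    have hdb := dval_spec m b c (sumLen m) (by omega) hcb
    have hmeet : meetsB m a b (max (dval m a c) (dval m b c)) = true :=
      (meetsB_iff m a b _).mpr ⟨c,
        ballL_mono m a c _ _ (le_max_left _ _) hda.2,
        ballL_mono m b c _ _ (le_max_right _ _) hdb.2⟩
    have hple : pMeet m a b ≤ max (dval m a c) (dval m b c) := by
      by_contra hgt
      have := pMeet_min m a b _ (Nat.not_le.mp hgt)
      rw [this] at hmeet; exact absurd hmeet (by simp)
    show ((pMeet m a b : Nat) : Int) ≤ max v
      ((bBFS m (sumLen m) ((m.headD []).length : Int) b).getD c 0)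
    rw [hva, hbgetD c hqc, ← Nat.cast_max]
    exact_mod_cast hple
  · -- the meeting cell itself is a common key attaining pMeet
    left
    have hmeets := meetsB_pMeet m a b hp
    rcases (meetsB_iff m a b _).mp hmeets with ⟨c, hc1, hc2⟩
    have hpb : pMeet m a b ≤ sumLen m := pMeet_le m a b hp
    have hcaK : c ∈ ballL m a (sumLen m) := ballL_mono m a c _ _ hpb hc1
    have hcbK : c ∈ ballL m b (sumLen m) := ballL_mono m b c _ _ hpb hc2
    have hconta : (bBFS m (sumLen m) ((m.headD []).length : Int) a).contains c = true :=
      (hacont c).mpr hcaK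
    rw [PySem.Dict.contains_eq_isSome_get?] at hconta
    rcases Option.isSome_iff_exists.mp hconta with ⟨v, hv⟩
    have hmemitems : (c, v) ∈ (bBFS m (sumLen m) ((m.headD []).length : Int) a).items :=
      PySem.Dict.mem_items_of_get?_eq_some _ hv
    have hqc : (bBFS m (sumLen m) ((m.headD []).length : Int) b).contains c = true :=
      (hbcont c).mpr hcbK
    refine ⟨(c, v), hmemitems, hqc, ?_⟩
    have hva : v = ((dval m a c : Nat) : Int) := haval c v hv
    have hda := dval_spec m a c (pMeet m a b) (by omega) hc1
    have hdb := dval_spec m b c (pMeet m a b) (by omega) hc2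
    show max v ((bBFS m (sumLen m) ((m.headD []).length : Int) b).getD c 0) ≤
      ((pMeet m a b : Nat) : Int)
    rw [hva, hbgetD c hqc, ← Nat.cast_max]
    exact_mod_cast Nat.max_le.mpr ⟨hda.1, hdb.1⟩

-- ---------- final assembly ----------

lemma nested_max_le {α β : Type} (innerL : α → List β) (g : α → β → Int) :
    ∀ (outer : List α) (acc bound : Int), acc ≤ bound →
      (∀ a ∈ outer, ∀ b ∈ innerL a, g a b ≤ bound) →
      outer.foldl (fun acc a => (innerL a).foldl (fun acc2 b => max acc2 (g a b)) acc) acc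
        ≤ bound := by
  intro outer
  induction outer with
  | nil => intro acc bound ha _; simpa using ha
  | cons y t ih =>
    intro acc bound ha h
    simp only [List.foldl_cons]
    refine ih _ bound ?_ (fun a hat b hb => h a (by simp [hat]) b hb)
    exact foldl_max_le_int (innerL y) (g y) acc bound ha (fun b hb => h y (by simp) b hb)

-- ===== VERDICT (by name: the statement is the Claim_ definition above) =====
theorem solve_spec : Claim_equal_solve := by
  intro m _ hpre
  obtain ⟨hshape, hconn⟩ := hpre
  show solve m = solve_alt m
  have hnd := nodup_peopleL m
  have hp : ∀ s ∈ peopleL m, ∀ s' ∈ peopleL m, meetsB m s s' (sumLen m) = true :=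
    fun s hs s' hs' => (meetsB_iff m s s' (sumLen m)).mpr (hconn s hs s' hs')
  by_cases hP : peopleL m = []
  · -- no people: both return 0
    have hA : solve m = 0 := by
      have hsz : (initA m).1.size = 0 := by
        rw [initA_eq, hP]
        rfl
      simp only [solve]
      rw [if_pos hsz]
    have hB : solve_alt m = 0 := by
      simp only [solve_alt]
      rw [if_pos (by rw [hP]; rfl)]
    rw [hA, hB]
  · -- at least one person
    obtain ⟨s0, rest, hPcons⟩ : ∃ s0 rest, peopleL m = s0 :: rest := by
      cases h : peopleL m with
      | nil => exact absurd h hP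
      | cons a l => exact ⟨a, l, rfl⟩
    have hkeys1 : (initA m).1.keys = peopleL m := by
      rw [initA_eq]; exact keys_foldl_insert_fresh _ _ hnd
    have hsz : (initA m).1.size = (peopleL m).length := by
      have h1 : (initA m).1.size = (initA m).1.keys.length := by
        show (initA m).1.items.length = ((initA m).1.items.map (·.1)).length
        rw [List.length_map]
      rw [h1, hkeys1]
    have hsizene : ¬ ((initA m).1.size = 0) := by
      rw [hsz, hPcons]; simp
    -- run the A-side loop
    obtain ⟨t', ht', hInv⟩ := loopA_spec m hp (sumLen m + 2) 0
      ⟨(initA m).1, (initA m).2,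
        (initA m).1.keys.foldl (fun d k => d.insert k (0 : Int)) PySem.Dict.empty,
        (initA m).1.keys.foldl (fun d k => d.insert k false) PySem.Dict.empty⟩
      (invA_init m)
      (fun s hs => by have := Mval_le_sumLen m s (hp s hs); omega)
    obtain ⟨_, _, hk3, _, hS⟩ := hInv
    have hAeq : solve m = (PySem.List.max? (loopA m (sumLen m + 2)
        ⟨(initA m).1, (initA m).2,
          (initA m).1.keys.foldl (fun d k => d.insert k (0 : Int)) PySem.Dict.empty,
          (initA m).1.keys.foldl (fun d k => d.insert k false) PySem.Dict.empty⟩).cost.values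
        (fun x => x)).getD 0 := by
      simp only [solve]
      rw [if_neg hsizene]
      rfl
    have hvals : (loopA m (sumLen m + 2)
        ⟨(initA m).1, (initA m).2,
          (initA m).1.keys.foldl (fun d k => d.insert k (0 : Int)) PySem.Dict.empty,
          (initA m).1.keys.foldl (fun d k => d.insert k false) PySem.Dict.empty⟩).cost.values
        = (peopleL m).map (fun s => ((Mval m s : Nat) : Int)) := by
      rw [PySem.Dict.values_eq_map_keys _ (by rw [hk3]; exact hnd) 0, hk3]
      apply List.map_congr_left
      intro s hs
      rw [PySem.Dict.getD_eq_get?_getD, (hS s hs).2.1, Option.getD_some]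
      congr 1
      have := ht' s hs
      omega
    have hmax : solve m = (rest.map (fun s => ((Mval m s : Nat) : Int))).foldl max
        ((Mval m s0 : Nat) : Int) := by
      rw [hAeq, hvals, hPcons]
      simp only [List.map_cons]
      rw [PySem.List.max?_id_cons, Option.getD_some]
    -- facts about the A-side value
    have hAge : ∀ s ∈ peopleL m, ((Mval m s : Nat) : Int) ≤ solve m := by
      intro s hs
      rw [hmax]
      rcases List.mem_cons.mp (hPcons ▸ hs) with rfl | hsr
      · exact (PySem.List.le_foldl_max _ _).1
      · exact (PySem.List.le_foldl_max _ _).2 _ (List.mem_map_of_mem hsr)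
    have hA0 : 0 ≤ solve m := by
      have := hAge s0 (by rw [hPcons]; simp)
      have h0 : (0 : Int) ≤ ((Mval m s0 : Nat) : Int) := by positivity
      omega
    -- the B side
    have hBeq : solve_alt m =
        (PySem.List.pyRange 0 (((peopleL m).length : Nat) : Int) 1).foldl (fun best a =>
          (PySem.List.pyRange (a + 1) (((peopleL m).length : Nat) : Int) 1).foldl (fun best b =>
            let da := PySem.List.pyGetD
              ((peopleL m).map (bBFS m (sumLen m) ((m.headD []).length : Int))) a
              PySem.Dict.empty
            let db := PySem.List.pyGetD
              ((peopleL m).map (bBFS m (sumLen m) ((m.headD []).length : Int))) b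
              PySem.Dict.empty
            let mm := da.items.foldl (fun (mm : Option Int) cv =>
              if db.contains cv.1 then
                let v := max cv.2 (db.getD cv.1 0)
                if mm.isNone ∨ v < mm.getD 0 then some v else mm
              else mm) none
            max best (mm.getD 0)) best) 0 := by
      simp only [solve_alt]
      rw [if_neg (by rw [hPcons]; simp)]
      rfl
    have hPidx : ∀ (i : Int), 0 ≤ i → i < (((peopleL m).length : Nat) : Int) →
        PySem.List.pyGetD ((peopleL m).map (bBFS m (sumLen m) ((m.headD []).length : Int))) i
          PySem.Dict.empty = bBFS m (sumLen m) ((m.headD []).length : Int)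
            (PySem.List.pyGetD (peopleL m) i ((0 : Int), (0 : Int))) := by
      intro i h0 hlt
      have hi : i.toNat < (peopleL m).length := by omega
      rw [← Int.toNat_of_nonneg h0, PySem.List.pyGetD_natCast, PySem.List.pyGetD_natCast,
        List.getD_eq_getElem _ _ (by simpa using hi), List.getD_eq_getElem _ _ hi,
        List.getElem_map]
    have hPmem : ∀ (i : Int), 0 ≤ i → i < (((peopleL m).length : Nat) : Int) →
        PySem.List.pyGetD (peopleL m) i ((0 : Int), (0 : Int)) ∈ peopleL m := by
      intro i h0 hlt
      have hi : i.toNat < (peopleL m).length := by omega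
      rw [← Int.toNat_of_nonneg h0, PySem.List.pyGetD_natCast,
        List.getD_eq_getElem _ _ hi]
      exact List.getElem_mem _
    have hcongr : solve_alt m =
        (PySem.List.pyRange 0 (((peopleL m).length : Nat) : Int) 1).foldl (fun best a =>
          (PySem.List.pyRange (a + 1) (((peopleL m).length : Nat) : Int) 1).foldl (fun best b =>
            max best ((pMeet m (PySem.List.pyGetD (peopleL m) a ((0 : Int), (0 : Int)))
              (PySem.List.pyGetD (peopleL m) b ((0 : Int), (0 : Int))) : Nat) : Int)) best) 0 := by
      rw [hBeq]
      apply PySem.List.foldl_congr_mem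
      intro acc a ha
      obtain ⟨ha0, han⟩ := (PySem.List.mem_pyRange_one).mp ha
      apply PySem.List.foldl_congr_mem
      intro acc2 b hb
      obtain ⟨hb1, hbn⟩ := (PySem.List.mem_pyRange_one).mp hb
      have hb0 : (0 : Int) ≤ b := by omega
      simp only []
      rw [hPidx a ha0 han, hPidx b hb0 hbn]
      rw [pairFold_spec m _ _ (hp _ (hPmem a ha0 han) _ (hPmem b hb0 hbn)), Option.getD_some]
    -- bounds for the B-side fold
    have hstep_out : ∀ (acc : Int) (a : Int), acc ≤
        (PySem.List.pyRange (a + 1) (((peopleL m).length : Nat) : Int) 1).foldl (fun best b =>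
          max best ((pMeet m (PySem.List.pyGetD (peopleL m) a ((0 : Int), (0 : Int)))
            (PySem.List.pyGetD (peopleL m) b ((0 : Int), (0 : Int))) : Nat) : Int)) acc := by
      intro acc a
      exact foldl_le_of_step _ (fun acc2 x => le_max_left _ _) _ acc
    have hB0 : 0 ≤ solve_alt m := by
      rw [hcongr]
      exact foldl_le_of_step _ (fun acc a => hstep_out acc a) _ 0
    have hBpair : ∀ (i j : Int), 0 ≤ i → i < j → j < (((peopleL m).length : Nat) : Int) →
        ((pMeet m (PySem.List.pyGetD (peopleL m) i ((0 : Int), (0 : Int)))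
          (PySem.List.pyGetD (peopleL m) j ((0 : Int), (0 : Int))) : Nat) : Int)
          ≤ solve_alt m := by
      intro i j h0 hij hjn
      rw [hcongr]
      have hinner : ∀ acc : Int,
          ((pMeet m (PySem.List.pyGetD (peopleL m) i ((0 : Int), (0 : Int)))
            (PySem.List.pyGetD (peopleL m) j ((0 : Int), (0 : Int))) : Nat) : Int) ≤
          (PySem.List.pyRange (i + 1) (((peopleL m).length : Nat) : Int) 1).foldl (fun best b =>
            max best ((pMeet m (PySem.List.pyGetD (peopleL m) i ((0 : Int), (0 : Int)))
              (PySem.List.pyGetD (peopleL m) b ((0 : Int), (0 : Int))) : Nat) : Int)) acc := by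
        intro acc
        have hmemj : j ∈ PySem.List.pyRange (i + 1) (((peopleL m).length : Nat) : Int) 1 :=
          (PySem.List.mem_pyRange_one).mpr ⟨by omega, hjn⟩
        exact foldl_attain
          (fun acc2 b => max acc2 ((pMeet m (PySem.List.pyGetD (peopleL m) i ((0 : Int), (0 : Int)))
            (PySem.List.pyGetD (peopleL m) b ((0 : Int), (0 : Int))) : Nat) : Int))
          (fun acc2 x => le_max_left _ _) _ j
          (fun acc2 => le_max_right _ _) _ acc hmemj
      have hmemi : i ∈ PySem.List.pyRange 0 (((peopleL m).length : Nat) : Int) 1 :=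
        (PySem.List.mem_pyRange_one).mpr ⟨h0, lt_trans hij hjn⟩
      exact foldl_attain
        (fun best a => (PySem.List.pyRange (a + 1) (((peopleL m).length : Nat) : Int) 1).foldl
          (fun best b => max best ((pMeet m (PySem.List.pyGetD (peopleL m) a ((0 : Int), (0 : Int)))
            (PySem.List.pyGetD (peopleL m) b ((0 : Int), (0 : Int))) : Nat) : Int)) best)
        (fun acc a => hstep_out acc a) _ i hinner _ 0 hmemi
    have hmeet_le_B : ∀ s ∈ peopleL m, ∀ s' ∈ peopleL m,
        ((pMeet m s s' : Nat) : Int) ≤ solve_alt m := by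
      intro s hs s' hs'
      rcases List.mem_iff_getElem.mp hs with ⟨i, hilt, rfl⟩
      rcases List.mem_iff_getElem.mp hs' with ⟨j, hjlt, rfl⟩
      have hgi : PySem.List.pyGetD (peopleL m) ((i : Nat) : Int) ((0 : Int), (0 : Int)) =
          (peopleL m)[i] := by
        rw [PySem.List.pyGetD_natCast, List.getD_eq_getElem _ _ hilt]
      have hgj : PySem.List.pyGetD (peopleL m) ((j : Nat) : Int) ((0 : Int), (0 : Int)) =
          (peopleL m)[j] := by
        rw [PySem.List.pyGetD_natCast, List.getD_eq_getElem _ _ hjlt]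
      rcases lt_trichotomy i j with hlt | heq | hgt
      · have := hBpair (i : Nat) (j : Nat) (by positivity) (by exact_mod_cast hlt)
          (by exact_mod_cast hjlt)
        rwa [hgi, hgj] at this
      · subst heq
        rw [pMeet_self]
        simpa using hB0
      · have := hBpair (j : Nat) (i : Nat) (by positivity) (by exact_mod_cast hgt)
          (by exact_mod_cast hilt)
        rw [hgi, hgj] at this
        rwa [pMeet_symm] at this
    -- solve m ≤ solve_alt m
    have hAB : solve m ≤ solve_alt m := by
      rw [hmax]
      have hMle : ∀ s ∈ peopleL m, ((Mval m s : Nat) : Int) ≤ solve_alt m := by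
        intro s hs
        have hMn : Mval m s ≤ (solve_alt m).toNat := by
          refine Mval_le m s _ ?_
          intro s' hs'
          have := hmeet_le_B s hs s' hs'
          omega
        omega
      refine foldl_max_le_int _ _ _ _ (hMle s0 (by rw [hPcons]; simp)) ?_
      intro x hx
      rcases List.mem_map.mp hx with ⟨s, hsr, rfl⟩
      exact hMle s (by rw [hPcons]; simp [hsr])
    -- solve_alt m ≤ solve m
    have hBA : solve_alt m ≤ solve m := by
      rw [hcongr]
      refine nested_max_le _ _ _ 0 (solve m) hA0 ?_
      intro a ha b hb
      obtain ⟨ha0, han⟩ := (PySem.List.mem_pyRange_one).mp ha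
      obtain ⟨hb1, hbn⟩ := (PySem.List.mem_pyRange_one).mp hb
      have hb0 : (0 : Int) ≤ b := by omega
      have hsa := hPmem a ha0 han
      have hsb := hPmem b hb0 hbn
      calc ((pMeet m (PySem.List.pyGetD (peopleL m) a ((0 : Int), (0 : Int)))
            (PySem.List.pyGetD (peopleL m) b ((0 : Int), (0 : Int))) : Nat) : Int)
          ≤ ((Mval m (PySem.List.pyGetD (peopleL m) a ((0 : Int), (0 : Int))) : Nat) : Int) := by
            exact_mod_cast pMeet_le_Mval m _ _ hsb
        _ ≤ solve m := hAge _ hsa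
    omega
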